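-- pv_equiv track=rewrite | github.com/DanielhowEde/py-fr | jatefr/utils/api/date_function_templater.py | _java_to_python_fmt
-- ===== SOURCE A (Python) =====
-- def _java_to_python_fmt(pattern: str) -> str:
--     """Best-effort Java SimpleDateFormat → Python strftime conversion."""
--     mapping = [
--         ("yyyy", "%Y"),
--         ("yy", "%y"),
--         ("MM", "%m"),
--         ("dd", "%d"),
--         ("HH", "%H"),
--         ("mm", "%M"),
--         ("ss", "%S"),
--         ("SSS", "%f"),
--         ("'T'", "T"),
--     ]
--     result = pattern
--     for java, py in mapping:
--         result = result.replace(java, py)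
--     return result
-- ===== SOURCE B (Python) =====
-- def _java_to_python_fmt(pattern: str) -> str:
--     """Best-effort Java SimpleDateFormat → Python strftime conversion.
--
--     Single left-to-right tokenizing scan instead of nine sequential global
--     replace passes: at each position try the tokens in order (longest first
--     for the same letter), emit the replacement and jump over the token, or
--     copy one character."""
--     out = []
--     i = 0
--     n = len(pattern)
--     while i < n:
--         if pattern.startswith("yyyy", i):
--             out.append("%Y"); i += 4
--         elif pattern.startswith("yy", i):
--             out.append("%y"); i += 2
--         elif pattern.startswith("MM", i):
--             out.append("%m"); i += 2
--         elif pattern.startswith("dd", i):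
--             out.append("%d"); i += 2
--         elif pattern.startswith("HH", i):
--             out.append("%H"); i += 2
--         elif pattern.startswith("mm", i):
--             out.append("%M"); i += 2
--         elif pattern.startswith("ss", i):
--             out.append("%S"); i += 2
--         elif pattern.startswith("SSS", i):
--             out.append("%f"); i += 3
--         elif pattern.startswith("'T'", i):
--             out.append("T"); i += 3
--         else:
--             out.append(pattern[i]); i += 1
--     return "".join(out)
-- ===== Notes on version B (the rewrite author's own statement) =====
-- stated objective: alternative
-- what changed: B replaces A's nine sequential whole-string replace passes by a single left-to-right tokenizing scan with a cursor, so every source character is read once and replacements are never rescanned.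
-- intended difference: On patterns where an inserted replacement collides with following pattern letters - an even-length nonzero run of capital-M immediately followed by lowercase-m, or an even-length nonzero run of lowercase-s immediately followed by two capital-S - A's later passes rescan the just-inserted percent code and corrupt the output (e.g. 'MMm' -> '%%M', 'ssSS' -> '%%f'), while B tokenizes each source character exactly once ('MMm' -> '%mm', 'ssSS' -> '%SSS'), which is the intended per-token conversion. — e.g. on _java_to_python_fmt("MMm"): A returns "%%M", B returns "%mm"
import Mathlib
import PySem

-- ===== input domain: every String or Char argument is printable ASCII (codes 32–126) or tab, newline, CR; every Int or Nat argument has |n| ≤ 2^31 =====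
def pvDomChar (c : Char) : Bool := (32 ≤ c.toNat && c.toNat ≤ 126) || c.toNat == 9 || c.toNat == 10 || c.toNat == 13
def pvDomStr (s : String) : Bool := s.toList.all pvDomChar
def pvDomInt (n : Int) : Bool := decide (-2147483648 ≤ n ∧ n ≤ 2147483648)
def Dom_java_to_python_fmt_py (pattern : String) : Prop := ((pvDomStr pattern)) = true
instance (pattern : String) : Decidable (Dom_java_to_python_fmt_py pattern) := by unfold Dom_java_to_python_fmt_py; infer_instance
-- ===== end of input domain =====

-- B re-implements A's nine sequential global replace passes as one left-to-right tokenizing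
-- scan (objective: alternative single-pass algorithm); on the exceptional inputs described at
-- D_java_to_python_fmt_py the two differ and B's per-token output is the intended one.

-- ===== PORT A =====
-- A: result = pattern; for (java, py) in mapping: result = result.replace(java, py)
def java_to_python_fmt_py (pattern : String) : String :=
  ([("yyyy", "%Y"), ("yy", "%y"), ("MM", "%m"), ("dd", "%d"), ("HH", "%H"),
    ("mm", "%M"), ("ss", "%S"), ("SSS", "%f"), ("'T'", "T")] : List (String × String)).foldl
    (fun result jp => PySem.Str.replace result jp.1 jp.2) pattern

-- ===== PORT B =====
-- B's scan loop: at each position try the 9 tokens in order (the fixed token list is unrolled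
-- into the match arms, in the same order), emit the replacement and skip the token, else copy
-- one character.
def scanB : List Char → List Char
  | 'y'::'y'::'y'::'y'::t => '%'::'Y'::scanB t
  | 'y'::'y'::t => '%'::'y'::scanB t
  | 'M'::'M'::t => '%'::'m'::scanB t
  | 'd'::'d'::t => '%'::'d'::scanB t
  | 'H'::'H'::t => '%'::'H'::scanB t
  | 'm'::'m'::t => '%'::'M'::scanB t
  | 's'::'s'::t => '%'::'S'::scanB t
  | 'S'::'S'::'S'::t => '%'::'f'::scanB t
  | '\''::'T'::'\''::t => 'T'::scanB t
  | c :: t => c :: scanB t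
  | [] => []

def java_to_python_fmt_py_alt (pattern : String) : String :=
  String.ofList (scanB pattern.toList)

-- ===== PRECONDITION & SPEC =====
-- On patterns where an inserted replacement collides with following pattern letters — an
-- even-length nonzero run of capital-M immediately followed by lowercase-m, or an even-length
-- nonzero run of lowercase-s immediately followed by two capital-S — A's later passes rescan
-- the just-inserted percent code and corrupt the output (e.g. 'MMm' → '%%M'), while B
-- tokenizes each source character exactly once ('MMm' → '%mm'), which is the intended
-- per-token conversion.  (Stated on the REVERSED pattern: some suffix starts with lowercase-m
-- then an odd capital-M run, or with two capital-S then an odd lowercase-s run.)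
def D_java_to_python_fmt_py (pattern : String) : Prop :=
  ∃ x ∈ [['m', 'M'], ['S', 'S', 's']], ∃ t ∈ pattern.toList.reverse.tails,
    x.isPrefixOf t ∧ ((t.drop (x.length - 1)).takeWhile (· == x.getLast!)).length % 2 = 0

instance (pattern : String) : Decidable (D_java_to_python_fmt_py pattern) := by
  unfold D_java_to_python_fmt_py; infer_instance

def Spec_java_to_python_fmt_py (pattern : String) (out : String) : Prop :=
  ¬ D_java_to_python_fmt_py pattern → out = java_to_python_fmt_py_alt pattern

instance (pattern : String) (out : String) : Decidable (Spec_java_to_python_fmt_py pattern out) := by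
  unfold Spec_java_to_python_fmt_py; infer_instance

def pvDiffWitness_java_to_python_fmt_py : String := "MMm"

def pvDiffWitnessOut_java_to_python_fmt_py : String × String := ("%%M", "%mm")

-- ===== CLAIM (what is proved, stated in full; the proofs are below) =====
def Claim_unchanged_java_to_python_fmt_py : Prop :=
  ∀ (pattern : String), Dom_java_to_python_fmt_py pattern →
    Spec_java_to_python_fmt_py pattern (java_to_python_fmt_py pattern)

def Claim_changed_java_to_python_fmt_py : Prop :=
  Dom_java_to_python_fmt_py (pvDiffWitness_java_to_python_fmt_py) ∧
  D_java_to_python_fmt_py (pvDiffWitness_java_to_python_fmt_py) ∧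
  java_to_python_fmt_py (pvDiffWitness_java_to_python_fmt_py) = pvDiffWitnessOut_java_to_python_fmt_py.1 ∧
  java_to_python_fmt_py_alt (pvDiffWitness_java_to_python_fmt_py) = pvDiffWitnessOut_java_to_python_fmt_py.2 ∧
  pvDiffWitnessOut_java_to_python_fmt_py.1 ≠ pvDiffWitnessOut_java_to_python_fmt_py.2

def Claim_exact_java_to_python_fmt_py : Prop :=
  ∀ (pattern : String), Dom_java_to_python_fmt_py pattern →
    D_java_to_python_fmt_py pattern →
    java_to_python_fmt_py pattern ≠ java_to_python_fmt_py_alt pattern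


-- ===== LEMMAS AND PROOFS =====

def repl (o : Char) (os new : List Char) : List Char → List Char
  | [] => []
  | c :: t => if (o :: os).isPrefixOf (c :: t) then new ++ repl o os new (t.drop os.length)
              else c :: repl o os new t
termination_by l => l.length
decreasing_by all_goals (simp only [List.length_cons, List.length_drop]; omega)

lemma repl_cons (o : Char) (os new : List Char) (c : Char) (t : List Char) :
    repl o os new (c :: t) =
      if (o :: os).isPrefixOf (c :: t) then new ++ repl o os new (t.drop os.length)
      else c :: repl o os new t := by
  simp [repl]

lemma repl_cons_neg (o : Char) (os new : List Char) (c : Char) (t : List Char)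
    (h : (o :: os).isPrefixOf (c :: t) = false) :
    repl o os new (c :: t) = c :: repl o os new t := by
  rw [repl_cons, h]; simp

lemma repl_tok (o : Char) (os new x : List Char) :
    repl o os new ((o :: os) ++ x) = new ++ repl o os new x := by
  have hp : (o :: os).isPrefixOf (o :: (os ++ x)) = true := by
    rw [List.isPrefixOf_iff_prefix]
    exact (List.prefix_append (o :: os) x).trans (by simp)
  rw [List.cons_append, repl_cons, hp]
  simp

lemma go_spec (o : Char) (os new : List Char) :
    ∀ fuel l acc, l.length ≤ fuel →
      PySem.Chars.replace.go (o :: os) new fuel l acc = acc.reverse ++ repl o os new l := by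
  intro fuel
  induction fuel with
  | zero =>
    intro l acc h
    have : l = [] := by
      cases l with
      | nil => rfl
      | cons c t => simp at h
    subst this
    rw [PySem.Chars.replace.go.eq_def]
    simp [repl]
  | succ n ih =>
    intro l acc h
    cases l with
    | nil => rw [PySem.Chars.replace.go.eq_def]; simp [repl]
    | cons c t =>
      rw [PySem.Chars.replace.go.eq_def]
      simp only []
      by_cases hp : (o :: os).isPrefixOf (c :: t) = true
      · rw [if_pos hp, repl_cons, if_pos hp]
        have hlen : (List.drop (o :: os).length (c :: t)).length ≤ n := by
          simp only [List.length_drop, List.length_cons] at *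
          omega
        rw [ih _ _ hlen]
        have : List.drop (o :: os).length (c :: t) = t.drop os.length := by
          simp [List.length_cons, List.drop_succ_cons]
        rw [this]
        simp
      · rw [if_neg hp, repl_cons, if_neg hp]
        have hlen : t.length ≤ n := by simp at h; omega
        rw [ih _ _ hlen]
        simp

lemma replace_eq_repl (o : Char) (os new s : List Char) :
    PySem.Chars.replace s (o :: os) new = repl o os new s := by
  rw [PySem.Chars.replace]
  simp only [List.isEmpty_cons]
  have := go_spec o os new s.length s [] le_rfl
  simpa using this

lemma repl_nil (o : Char) (os new : List Char) : repl o os new [] = [] := by simp [repl]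

def lpow (a : List Char) : Nat → List Char
  | 0 => []
  | q + 1 => a ++ lpow a q

lemma mem_lpow (c : Char) (a : List Char) (q : Nat) (h : c ∈ lpow a q) : c ∈ a := by
  induction q with
  | zero => simp [lpow] at h
  | succ n ih =>
    simp [lpow] at h
    rcases h with h | h
    · exact h
    · exact ih h

lemma isPrefixOf_false_of_head (o : Char) (os x : List Char) (h : x.head? ≠ some o) :
    (o :: os).isPrefixOf x = false := by
  cases x with
  | nil => simp [List.isPrefixOf]
  | cons c t =>
    simp only [List.head?_cons, ne_eq, Option.some.injEq] at h
    simp [List.isPrefixOf, Ne.symm h]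

lemma repl_append_not_mem (o : Char) (os new a x : List Char) (h : o ∉ a) :
    repl o os new (a ++ x) = a ++ repl o os new x := by
  induction a with
  | nil => simp
  | cons c a' ih =>
    have hne : o ≠ c := fun hh => h (by simp [hh])
    rw [List.cons_append, repl_cons]
    rw [show ((o :: os).isPrefixOf (c :: (a' ++ x))) = false by simp [List.isPrefixOf, hne]]
    simp only [Bool.false_eq_true, if_false, List.cons_append]
    rw [ih (fun hh => h (by simp [hh]))]

lemma head?_repl (o : Char) (os : List Char) (n0 : Char) (ns x : List Char) :
    (repl o os (n0 :: ns) x).head? = x.head? ∨ (repl o os (n0 :: ns) x).head? = some n0 := by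
  cases x with
  | nil => left; simp [repl_nil]
  | cons c t =>
    rw [repl_cons]
    by_cases hp : (o :: os).isPrefixOf (c :: t) = true
    · right; rw [if_pos hp]; simp
    · left
      rw [if_neg hp]; simp

lemma repl_head_ne (o : Char) (os : List Char) (n0 : Char) (ns x : List Char) (d : Char)
    (hx : x.head? ≠ some d) (h0 : n0 ≠ d) :
    (repl o os (n0 :: ns) x).head? ≠ some d := by
  rcases head?_repl o os n0 ns x with h | h <;> rw [h]
  · exact hx
  · simp [h0]

lemma notPrefix_replicate (L : Char) (k m : Nat) (x : List Char)
    (hk : m < k) (hx : x.head? ≠ some L) :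
    (List.replicate k L).isPrefixOf (List.replicate m L ++ x) = false := by
  induction m generalizing k with
  | zero =>
    cases k with
    | zero => omega
    | succ k' => simpa using isPrefixOf_false_of_head L (List.replicate k' L) x hx
  | succ m' ih =>
    cases k with
    | zero => omega
    | succ k' =>
      simp only [List.replicate_succ, List.cons_append, List.isPrefixOf_cons₂_self]
      exact ih k' (by omega)

lemma repl_replicate_lt (L : Char) (w : Nat) (new : List Char) (m : Nat) (x : List Char)
    (hw : m < w) (hx : x.head? ≠ some L) :
    repl L (List.replicate (w - 1) L) new (List.replicate m L ++ x)
      = List.replicate m L ++ repl L (List.replicate (w - 1) L) new x := by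
  induction m with
  | zero => simp
  | succ m' ih =>
    rw [List.replicate_succ, List.cons_append, repl_cons]
    have hnp : (List.replicate (w - 1) L).isPrefixOf (List.replicate m' L ++ x) = false :=
      notPrefix_replicate L (w - 1) m' x (by omega) hx
    rw [show ((L :: List.replicate (w - 1) L).isPrefixOf (L :: (List.replicate m' L ++ x))) = false by
      simp [List.isPrefixOf, hnp]]
    simp only [Bool.false_eq_true, if_false]
    rw [ih (by omega)]
    simp [List.replicate_succ]

lemma repl_run (L : Char) (w : Nat) (new : List Char) (hw : 1 ≤ w) :
    ∀ n x, x.head? ≠ some L →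
      repl L (List.replicate (w - 1) L) new (List.replicate n L ++ x)
        = lpow new (n / w) ++ List.replicate (n % w) L
            ++ repl L (List.replicate (w - 1) L) new x := by
  intro n
  induction n using Nat.strong_induction_on with
  | _ n ih =>
    intro x hx
    by_cases hn : n < w
    · rw [repl_replicate_lt L w new n x hn hx]
      rw [Nat.div_eq_of_lt hn, Nat.mod_eq_of_lt hn]
      simp [lpow]
    · push_neg at hn
      have hsplit : List.replicate n L = (L :: List.replicate (w - 1) L) ++ List.replicate (n - w) L := by
        rw [← List.replicate_succ]
        rw [← List.replicate_add]
        congr 1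
        omega
      rw [hsplit, List.append_assoc, repl_tok]
      rw [ih (n - w) (by omega) x hx]
      have hdiv : n / w = (n - w) / w + 1 := by
        rw [← Nat.add_div_right _ (by omega : 0 < w)]
        congr 1
        omega
      have hmod : n % w = (n - w) % w := by
        conv_lhs => rw [show n = (n - w) + w by omega]
        rw [Nat.add_mod_right]
      rw [hdiv, hmod]
      simp [lpow]

lemma repl_mm_pass (new : List Char) (q : Nat) (x : List Char) (hx : x.head? ≠ some 'm') :
    repl 'm' ['m'] new (lpow ['%','m'] q ++ x) = lpow ['%','m'] q ++ repl 'm' ['m'] new x := by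
  induction q with
  | zero => simp [lpow]
  | succ q' ih =>
    have hhead : (lpow ['%','m'] q' ++ x).head? ≠ some 'm' := by
      cases q' with
      | zero => simpa [lpow] using hx
      | succ q'' => simp [lpow]
    rw [show lpow ['%','m'] (q' + 1) = '%' :: 'm' :: lpow ['%','m'] q' by simp [lpow]]
    rw [List.cons_append, List.cons_append, repl_cons]
    rw [isPrefixOf_false_of_head 'm' ['m'] _ (by simp)]
    simp only [Bool.false_eq_true, if_false]
    rw [repl_cons]
    rw [show (('m' :: ['m']).isPrefixOf ('m' :: (lpow ['%','m'] q' ++ x))) = false by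
      simp [List.isPrefixOf, isPrefixOf_false_of_head 'm' [] _ hhead]]
    simp only [Bool.false_eq_true, if_false]
    rw [ih]
    simp

lemma repl_sss_pass (new : List Char) (q : Nat) (x : List Char)
    (hx : (['S','S'].isPrefixOf x) = false) :
    repl 'S' ['S','S'] new (lpow ['%','S'] q ++ x) = lpow ['%','S'] q ++ repl 'S' ['S','S'] new x := by
  induction q with
  | zero => simp [lpow]
  | succ q' ih =>
    have htail : (['S','S'].isPrefixOf (lpow ['%','S'] q' ++ x)) = false := by
      cases q' with
      | zero => simpa [lpow] using hx
      | succ q'' => exact isPrefixOf_false_of_head 'S' ['S'] _ (by simp [lpow])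
    rw [show lpow ['%','S'] (q' + 1) = '%' :: 'S' :: lpow ['%','S'] q' by simp [lpow]]
    rw [List.cons_append, List.cons_append, repl_cons]
    rw [isPrefixOf_false_of_head 'S' ['S','S'] _ (by simp)]
    simp only [Bool.false_eq_true, if_false]
    rw [repl_cons]
    rw [show (('S' :: ['S','S']).isPrefixOf ('S' :: (lpow ['%','S'] q' ++ x))) = false by
      simp [List.isPrefixOf, htail]]
    simp only [Bool.false_eq_true, if_false]
    rw [ih]
    simp

lemma scan_cons_default (c : Char) (t : List Char) (h1 : c ≠ 'y') (h2 : c ≠ 'M') (h3 : c ≠ 'd')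
    (h4 : c ≠ 'H') (h5 : c ≠ 'm') (h6 : c ≠ 's') (h7 : c ≠ 'S') (h8 : c ≠ '\'') :
    scanB (c :: t) = c :: scanB t := by
  cases t with
  | nil => simp [scanB]
  | cons d u => simp [scanB, h1, h2, h3, h4, h5, h6, h7, h8]

lemma scan_M1 (t : List Char) (h : t.head? ≠ some 'M') : scanB ('M' :: t) = 'M' :: scanB t := by
  cases t with
  | nil => simp [scanB]
  | cons d u =>
    simp only [List.head?_cons, ne_eq, Option.some.injEq] at h
    simp [scanB, h]

lemma scan_run_M : ∀ n t, t.head? ≠ some 'M' →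
    scanB (List.replicate n 'M' ++ t)
      = lpow ['%','m'] (n / 2) ++ List.replicate (n % 2) 'M' ++ scanB t := by
  intro n
  induction n using Nat.strong_induction_on with
  | _ n ih =>
    intro t ht
    match n with
    | 0 => simp [lpow]
    | 1 => simpa [lpow] using scan_M1 t ht
    | (m + 2) =>
      rw [show List.replicate (m + 2) 'M' ++ t = 'M' :: 'M' :: (List.replicate m 'M' ++ t) by
        simp [List.replicate_succ]]
      rw [show scanB ('M' :: 'M' :: (List.replicate m 'M' ++ t))
            = '%' :: 'm' :: scanB (List.replicate m 'M' ++ t) by simp [scanB]]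
      rw [ih m (by omega) t ht]
      have h2 : (m + 2) / 2 = m / 2 + 1 := by omega
      have h3 : (m + 2) % 2 = m % 2 := by omega
      rw [h2, h3]
      simp [lpow]

lemma scan_d1 (t : List Char) (h : t.head? ≠ some 'd') : scanB ('d' :: t) = 'd' :: scanB t := by
  cases t with
  | nil => simp [scanB]
  | cons d u =>
    simp only [List.head?_cons, ne_eq, Option.some.injEq] at h
    simp [scanB, h]

lemma scan_run_d : ∀ n t, t.head? ≠ some 'd' →
    scanB (List.replicate n 'd' ++ t)
      = lpow ['%','d'] (n / 2) ++ List.replicate (n % 2) 'd' ++ scanB t := by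
  intro n
  induction n using Nat.strong_induction_on with
  | _ n ih =>
    intro t ht
    match n with
    | 0 => simp [lpow]
    | 1 => simpa [lpow] using scan_d1 t ht
    | (m + 2) =>
      rw [show List.replicate (m + 2) 'd' ++ t = 'd' :: 'd' :: (List.replicate m 'd' ++ t) by
        simp [List.replicate_succ]]
      rw [show scanB ('d' :: 'd' :: (List.replicate m 'd' ++ t))
            = '%' :: 'd' :: scanB (List.replicate m 'd' ++ t) by simp [scanB]]
      rw [ih m (by omega) t ht]
      have h2 : (m + 2) / 2 = m / 2 + 1 := by omega
      have h3 : (m + 2) % 2 = m % 2 := by omega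
      rw [h2, h3]
      simp [lpow]

lemma scan_H1 (t : List Char) (h : t.head? ≠ some 'H') : scanB ('H' :: t) = 'H' :: scanB t := by
  cases t with
  | nil => simp [scanB]
  | cons d u =>
    simp only [List.head?_cons, ne_eq, Option.some.injEq] at h
    simp [scanB, h]

lemma scan_run_H : ∀ n t, t.head? ≠ some 'H' →
    scanB (List.replicate n 'H' ++ t)
      = lpow ['%','H'] (n / 2) ++ List.replicate (n % 2) 'H' ++ scanB t := by
  intro n
  induction n using Nat.strong_induction_on with
  | _ n ih =>
    intro t ht
    match n with
    | 0 => simp [lpow]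
    | 1 => simpa [lpow] using scan_H1 t ht
    | (m + 2) =>
      rw [show List.replicate (m + 2) 'H' ++ t = 'H' :: 'H' :: (List.replicate m 'H' ++ t) by
        simp [List.replicate_succ]]
      rw [show scanB ('H' :: 'H' :: (List.replicate m 'H' ++ t))
            = '%' :: 'H' :: scanB (List.replicate m 'H' ++ t) by simp [scanB]]
      rw [ih m (by omega) t ht]
      have h2 : (m + 2) / 2 = m / 2 + 1 := by omega
      have h3 : (m + 2) % 2 = m % 2 := by omega
      rw [h2, h3]
      simp [lpow]

lemma scan_m1 (t : List Char) (h : t.head? ≠ some 'm') : scanB ('m' :: t) = 'm' :: scanB t := by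
  cases t with
  | nil => simp [scanB]
  | cons d u =>
    simp only [List.head?_cons, ne_eq, Option.some.injEq] at h
    simp [scanB, h]

lemma scan_run_m : ∀ n t, t.head? ≠ some 'm' →
    scanB (List.replicate n 'm' ++ t)
      = lpow ['%','M'] (n / 2) ++ List.replicate (n % 2) 'm' ++ scanB t := by
  intro n
  induction n using Nat.strong_induction_on with
  | _ n ih =>
    intro t ht
    match n with
    | 0 => simp [lpow]
    | 1 => simpa [lpow] using scan_m1 t ht
    | (m + 2) =>
      rw [show List.replicate (m + 2) 'm' ++ t = 'm' :: 'm' :: (List.replicate m 'm' ++ t) by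
        simp [List.replicate_succ]]
      rw [show scanB ('m' :: 'm' :: (List.replicate m 'm' ++ t))
            = '%' :: 'M' :: scanB (List.replicate m 'm' ++ t) by simp [scanB]]
      rw [ih m (by omega) t ht]
      have h2 : (m + 2) / 2 = m / 2 + 1 := by omega
      have h3 : (m + 2) % 2 = m % 2 := by omega
      rw [h2, h3]
      simp [lpow]

lemma scan_s1 (t : List Char) (h : t.head? ≠ some 's') : scanB ('s' :: t) = 's' :: scanB t := by
  cases t with
  | nil => simp [scanB]
  | cons d u =>
    simp only [List.head?_cons, ne_eq, Option.some.injEq] at h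
    simp [scanB, h]

lemma scan_run_s : ∀ n t, t.head? ≠ some 's' →
    scanB (List.replicate n 's' ++ t)
      = lpow ['%','S'] (n / 2) ++ List.replicate (n % 2) 's' ++ scanB t := by
  intro n
  induction n using Nat.strong_induction_on with
  | _ n ih =>
    intro t ht
    match n with
    | 0 => simp [lpow]
    | 1 => simpa [lpow] using scan_s1 t ht
    | (m + 2) =>
      rw [show List.replicate (m + 2) 's' ++ t = 's' :: 's' :: (List.replicate m 's' ++ t) by
        simp [List.replicate_succ]]
      rw [show scanB ('s' :: 's' :: (List.replicate m 's' ++ t))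
            = '%' :: 'S' :: scanB (List.replicate m 's' ++ t) by simp [scanB]]
      rw [ih m (by omega) t ht]
      have h2 : (m + 2) / 2 = m / 2 + 1 := by omega
      have h3 : (m + 2) % 2 = m % 2 := by omega
      rw [h2, h3]
      simp [lpow]

lemma scan_S1 (t : List Char) (h : t.head? ≠ some 'S') : scanB ('S' :: t) = 'S' :: scanB t := by
  cases t with
  | nil => simp [scanB]
  | cons d u =>
    simp only [List.head?_cons, ne_eq, Option.some.injEq] at h
    simp [scanB, h]

lemma scan_S2 (t : List Char) (h : t.head? ≠ some 'S') :
    scanB ('S' :: 'S' :: t) = 'S' :: 'S' :: scanB t := by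
  cases t with
  | nil => simp [scanB]
  | cons d u =>
    simp only [List.head?_cons, ne_eq, Option.some.injEq] at h
    simp [scanB, h]

lemma scan_run_S : ∀ n t, t.head? ≠ some 'S' →
    scanB (List.replicate n 'S' ++ t)
      = lpow ['%','f'] (n / 3) ++ List.replicate (n % 3) 'S' ++ scanB t := by
  intro n
  induction n using Nat.strong_induction_on with
  | _ n ih =>
    intro t ht
    match n with
    | 0 => simp [lpow]
    | 1 => simpa [lpow] using scan_S1 t ht
    | 2 => simpa [lpow, List.replicate_succ] using scan_S2 t ht
    | (m + 3) =>
      rw [show List.replicate (m + 3) 'S' ++ t = 'S' :: 'S' :: 'S' :: (List.replicate m 'S' ++ t) by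
        simp [List.replicate_succ]]
      rw [show scanB ('S' :: 'S' :: 'S' :: (List.replicate m 'S' ++ t))
            = '%' :: 'f' :: scanB (List.replicate m 'S' ++ t) by simp [scanB]]
      rw [ih m (by omega) t ht]
      have h2 : (m + 3) / 3 = m / 3 + 1 := by omega
      have h3 : (m + 3) % 3 = m % 3 := by omega
      rw [h2, h3]
      simp [lpow]

lemma scan_y1 (t : List Char) (h : t.head? ≠ some 'y') : scanB ('y' :: t) = 'y' :: scanB t := by
  cases t with
  | nil => simp [scanB]
  | cons d u =>
    simp only [List.head?_cons, ne_eq, Option.some.injEq] at h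
    simp [scanB, h]

lemma scan_y2 (t : List Char) (h : t.head? ≠ some 'y') :
    scanB ('y' :: 'y' :: t) = '%' :: 'y' :: scanB t := by
  cases t with
  | nil => simp [scanB]
  | cons d u =>
    simp only [List.head?_cons, ne_eq, Option.some.injEq] at h
    simp [scanB, h]

lemma scan_y3 (t : List Char) (h : t.head? ≠ some 'y') :
    scanB ('y' :: 'y' :: 'y' :: t) = '%' :: 'y' :: 'y' :: scanB t := by
  cases t with
  | nil => simp [scanB]
  | cons d u =>
    simp only [List.head?_cons, ne_eq, Option.some.injEq] at h
    rw [show scanB ('y' :: 'y' :: 'y' :: d :: u) = '%' :: 'y' :: scanB ('y' :: d :: u) by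
      simp [scanB, h]]
    rw [scan_y1 (d :: u) (by simpa using h)]

lemma scan_run_y : ∀ n t, t.head? ≠ some 'y' →
    scanB (List.replicate n 'y' ++ t)
      = lpow ['%','Y'] (n / 4) ++ lpow ['%','y'] (n % 4 / 2)
          ++ List.replicate (n % 4 % 2) 'y' ++ scanB t := by
  intro n
  induction n using Nat.strong_induction_on with
  | _ n ih =>
    intro t ht
    match n with
    | 0 => simp [lpow]
    | 1 => simpa [lpow] using scan_y1 t ht
    | 2 => simpa [lpow, List.replicate_succ] using scan_y2 t ht
    | 3 => simpa [lpow, List.replicate_succ] using scan_y3 t ht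
    | (m + 4) =>
      rw [show List.replicate (m + 4) 'y' ++ t
            = 'y' :: 'y' :: 'y' :: 'y' :: (List.replicate m 'y' ++ t) by
        simp [List.replicate_succ]]
      rw [show scanB ('y' :: 'y' :: 'y' :: 'y' :: (List.replicate m 'y' ++ t))
            = '%' :: 'Y' :: scanB (List.replicate m 'y' ++ t) by simp [scanB]]
      rw [ih m (by omega) t ht]
      have h2 : (m + 4) / 4 = m / 4 + 1 := by omega
      have h3 : (m + 4) % 4 = m % 4 := by omega
      rw [h2, h3]
      simp [lpow]

lemma scan_quoteT (t : List Char) :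
    scanB ('\'' :: 'T' :: '\'' :: t) = 'T' :: scanB t := by
  simp [scanB]

lemma scan_quote_single (t : List Char) (h : ∀ u, t ≠ 'T' :: '\'' :: u) :
    scanB ('\'' :: t) = '\'' :: scanB t := by
  match t with
  | [] => simp [scanB]
  | [d] =>
    by_cases hd : d = 'T'
    · subst hd; simp [scanB]
    · simp [scanB, hd]
  | d :: e :: u =>
    by_cases hd : d = 'T'
    · subst hd
      have he : e ≠ '\'' := fun hh => h u (by rw [hh])
      simp [scanB, he]
    · simp [scanB, hd]

-- A's nine passes, staged.
def r1 : List Char → List Char := repl 'y' ['y','y','y'] ['%','Y']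
def r2 : List Char → List Char := repl 'y' ['y'] ['%','y']
def r3 : List Char → List Char := repl 'M' ['M'] ['%','m']
def r4 : List Char → List Char := repl 'd' ['d'] ['%','d']
def r5 : List Char → List Char := repl 'H' ['H'] ['%','H']
def r6 : List Char → List Char := repl 'm' ['m'] ['%','M']
def r7 : List Char → List Char := repl 's' ['s'] ['%','S']
def r8 : List Char → List Char := repl 'S' ['S','S'] ['%','f']
def r9 : List Char → List Char := repl '\'' ['T','\''] ['T']

def P9 (x : List Char) : List Char := r9 x
def P8 (x : List Char) : List Char := P9 (r8 x)
def P7 (x : List Char) : List Char := P8 (r7 x)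
def P6 (x : List Char) : List Char := P7 (r6 x)
def P5 (x : List Char) : List Char := P6 (r5 x)
def P4 (x : List Char) : List Char := P5 (r4 x)
def P3 (x : List Char) : List Char := P4 (r3 x)
def P2 (x : List Char) : List Char := P3 (r2 x)
def P1 (x : List Char) : List Char := P2 (r1 x)

lemma repl_cons_head_ne (o : Char) (os new : List Char) (c : Char) (t : List Char) (h : c ≠ o) :
    repl o os new (c :: t) = c :: repl o os new t :=
  repl_cons_neg o os new c t (isPrefixOf_false_of_head o os (c :: t) (by simp [h]))

lemma not_mem_lpow (c : Char) (a : List Char) (q : Nat) (h : c ∉ a) : c ∉ lpow a q :=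
  fun hm => h (mem_lpow c a q hm)

lemma not_mem_replicate (c L : Char) (n : Nat) (h : c ≠ L) : c ∉ List.replicate n L := by
  simp [List.mem_replicate, h]

-- run lemmas, per pass
lemma run_y4 (n : Nat) (x : List Char) (hx : x.head? ≠ some 'y') :
    r1 (List.replicate n 'y' ++ x)
      = lpow ['%','Y'] (n / 4) ++ List.replicate (n % 4) 'y' ++ r1 x := by
  have h := repl_run 'y' 4 ['%','Y'] (by omega) n x hx
  simpa [r1, show List.replicate 3 'y' = ['y','y','y'] from rfl] using h

lemma run_y2 (n : Nat) (x : List Char) (hx : x.head? ≠ some 'y') :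
    r2 (List.replicate n 'y' ++ x)
      = lpow ['%','y'] (n / 2) ++ List.replicate (n % 2) 'y' ++ r2 x := by
  have h := repl_run 'y' 2 ['%','y'] (by omega) n x hx
  simpa [r2, show List.replicate 1 'y' = ['y'] from rfl] using h

lemma run_M (n : Nat) (x : List Char) (hx : x.head? ≠ some 'M') :
    r3 (List.replicate n 'M' ++ x)
      = lpow ['%','m'] (n / 2) ++ List.replicate (n % 2) 'M' ++ r3 x := by
  have h := repl_run 'M' 2 ['%','m'] (by omega) n x hx
  simpa [r3, show List.replicate 1 'M' = ['M'] from rfl] using h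

lemma run_d (n : Nat) (x : List Char) (hx : x.head? ≠ some 'd') :
    r4 (List.replicate n 'd' ++ x)
      = lpow ['%','d'] (n / 2) ++ List.replicate (n % 2) 'd' ++ r4 x := by
  have h := repl_run 'd' 2 ['%','d'] (by omega) n x hx
  simpa [r4, show List.replicate 1 'd' = ['d'] from rfl] using h

lemma run_H (n : Nat) (x : List Char) (hx : x.head? ≠ some 'H') :
    r5 (List.replicate n 'H' ++ x)
      = lpow ['%','H'] (n / 2) ++ List.replicate (n % 2) 'H' ++ r5 x := by
  have h := repl_run 'H' 2 ['%','H'] (by omega) n x hx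
  simpa [r5, show List.replicate 1 'H' = ['H'] from rfl] using h

lemma run_m (n : Nat) (x : List Char) (hx : x.head? ≠ some 'm') :
    r6 (List.replicate n 'm' ++ x)
      = lpow ['%','M'] (n / 2) ++ List.replicate (n % 2) 'm' ++ r6 x := by
  have h := repl_run 'm' 2 ['%','M'] (by omega) n x hx
  simpa [r6, show List.replicate 1 'm' = ['m'] from rfl] using h

lemma run_s (n : Nat) (x : List Char) (hx : x.head? ≠ some 's') :
    r7 (List.replicate n 's' ++ x)
      = lpow ['%','S'] (n / 2) ++ List.replicate (n % 2) 's' ++ r7 x := by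
  have h := repl_run 's' 2 ['%','S'] (by omega) n x hx
  simpa [r7, show List.replicate 1 's' = ['s'] from rfl] using h

lemma run_S (n : Nat) (x : List Char) (hx : x.head? ≠ some 'S') :
    r8 (List.replicate n 'S' ++ x)
      = lpow ['%','f'] (n / 3) ++ List.replicate (n % 3) 'S' ++ r8 x := by
  have h := repl_run 'S' 3 ['%','f'] (by omega) n x hx
  simpa [r8, show List.replicate 2 'S' = ['S','S'] from rfl] using h

-- chunk pass-through for the tail stages
lemma P9_pass (a x : List Char) (h9 : '\'' ∉ a) : P9 (a ++ x) = a ++ P9 x := by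
  unfold P9 r9
  rw [repl_append_not_mem _ _ _ _ _ h9]

lemma P8_pass (a x : List Char) (h8 : 'S' ∉ a) (h9 : '\'' ∉ a) : P8 (a ++ x) = a ++ P8 x := by
  unfold P8 r8
  rw [repl_append_not_mem _ _ _ _ _ h8, ← r8, P9_pass _ _ h9]

lemma P7_pass (a x : List Char) (h7 : 's' ∉ a) (h8 : 'S' ∉ a) (h9 : '\'' ∉ a) :
    P7 (a ++ x) = a ++ P7 x := by
  unfold P7 r7
  rw [repl_append_not_mem _ _ _ _ _ h7, ← r7, P8_pass _ _ h8 h9]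

lemma P6_pass (a x : List Char) (h6 : 'm' ∉ a) (h7 : 's' ∉ a) (h8 : 'S' ∉ a) (h9 : '\'' ∉ a) :
    P6 (a ++ x) = a ++ P6 x := by
  unfold P6 r6
  rw [repl_append_not_mem _ _ _ _ _ h6, ← r6, P7_pass _ _ h7 h8 h9]

lemma P5_pass (a x : List Char) (h5 : 'H' ∉ a) (h6 : 'm' ∉ a) (h7 : 's' ∉ a) (h8 : 'S' ∉ a)
    (h9 : '\'' ∉ a) : P5 (a ++ x) = a ++ P5 x := by
  unfold P5 r5
  rw [repl_append_not_mem _ _ _ _ _ h5, ← r5, P6_pass _ _ h6 h7 h8 h9]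

lemma P4_pass (a x : List Char) (h4 : 'd' ∉ a) (h5 : 'H' ∉ a) (h6 : 'm' ∉ a) (h7 : 's' ∉ a)
    (h8 : 'S' ∉ a) (h9 : '\'' ∉ a) : P4 (a ++ x) = a ++ P4 x := by
  unfold P4 r4
  rw [repl_append_not_mem _ _ _ _ _ h4, ← r4, P5_pass _ _ h5 h6 h7 h8 h9]

lemma P3_pass (a x : List Char) (h3 : 'M' ∉ a) (h4 : 'd' ∉ a) (h5 : 'H' ∉ a) (h6 : 'm' ∉ a)
    (h7 : 's' ∉ a) (h8 : 'S' ∉ a) (h9 : '\'' ∉ a) : P3 (a ++ x) = a ++ P3 x := by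
  unfold P3 r3
  rw [repl_append_not_mem _ _ _ _ _ h3, ← r3, P4_pass _ _ h4 h5 h6 h7 h8 h9]

-- head preservation along the chain (all replacements of passes 1–8 start with '%')
lemma head_r (o : Char) (os : List Char) (n1 : Char) (t : List Char) (d : Char)
    (ht : t.head? ≠ some d) (hd : ('%' : Char) ≠ d) :
    (repl o os ('%' :: [n1]) t).head? ≠ some d :=
  repl_head_ne o os '%' [n1] t d ht hd

lemma head_c1 (t : List Char) (d : Char) (ht : t.head? ≠ some d) (hd : ('%' : Char) ≠ d) :
    (r1 t).head? ≠ some d := by unfold r1; exact head_r _ _ _ _ _ ht hd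
lemma head_c2 (t : List Char) (d : Char) (ht : t.head? ≠ some d) (hd : ('%' : Char) ≠ d) :
    (r2 (r1 t)).head? ≠ some d := by unfold r2; exact head_r _ _ _ _ _ (head_c1 t d ht hd) hd
lemma head_c3 (t : List Char) (d : Char) (ht : t.head? ≠ some d) (hd : ('%' : Char) ≠ d) :
    (r3 (r2 (r1 t))).head? ≠ some d := by unfold r3; exact head_r _ _ _ _ _ (head_c2 t d ht hd) hd
lemma head_c4 (t : List Char) (d : Char) (ht : t.head? ≠ some d) (hd : ('%' : Char) ≠ d) :
    (r4 (r3 (r2 (r1 t)))).head? ≠ some d := by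
  unfold r4; exact head_r _ _ _ _ _ (head_c3 t d ht hd) hd
lemma head_c5 (t : List Char) (d : Char) (ht : t.head? ≠ some d) (hd : ('%' : Char) ≠ d) :
    (r5 (r4 (r3 (r2 (r1 t))))).head? ≠ some d := by
  unfold r5; exact head_r _ _ _ _ _ (head_c4 t d ht hd) hd
lemma head_c6 (t : List Char) (d : Char) (ht : t.head? ≠ some d) (hd : ('%' : Char) ≠ d) :
    (r6 (r5 (r4 (r3 (r2 (r1 t)))))).head? ≠ some d := by
  unfold r6; exact head_r _ _ _ _ _ (head_c5 t d ht hd) hd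
lemma head_c7 (t : List Char) (d : Char) (ht : t.head? ≠ some d) (hd : ('%' : Char) ≠ d) :
    (r7 (r6 (r5 (r4 (r3 (r2 (r1 t))))))).head? ≠ some d := by
  unfold r7; exact head_r _ _ _ _ _ (head_c6 t d ht hd) hd
lemma head_c8 (t : List Char) (d : Char) (ht : t.head? ≠ some d) (hd : ('%' : Char) ≠ d) :
    (r8 (r7 (r6 (r5 (r4 (r3 (r2 (r1 t)))))))).head? ≠ some d := by
  unfold r8; exact head_r _ _ _ _ _ (head_c7 t d ht hd) hd

lemma chain7_nil : r7 (r6 (r5 (r4 (r3 (r2 (r1 [])))))) = [] := by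
  simp [r1, r2, r3, r4, r5, r6, r7, repl_nil]
lemma chain8_nil : r8 (r7 (r6 (r5 (r4 (r3 (r2 (r1 []))))))) = [] := by
  simp [r8, chain7_nil, repl_nil]

lemma chain7_S_cons (u : List Char) :
    r7 (r6 (r5 (r4 (r3 (r2 (r1 ('S' :: u)))))))
      = 'S' :: r7 (r6 (r5 (r4 (r3 (r2 (r1 u)))))) := by
  unfold r1 r2 r3 r4 r5 r6 r7
  rw [repl_cons_head_ne 'y' _ _ 'S' _ (by decide), repl_cons_head_ne 'y' _ _ 'S' _ (by decide),
      repl_cons_head_ne 'M' _ _ 'S' _ (by decide), repl_cons_head_ne 'd' _ _ 'S' _ (by decide),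
      repl_cons_head_ne 'H' _ _ 'S' _ (by decide), repl_cons_head_ne 'm' _ _ 'S' _ (by decide),
      repl_cons_head_ne 's' _ _ 'S' _ (by decide)]

lemma chain8_T_cons (u : List Char) :
    r8 (r7 (r6 (r5 (r4 (r3 (r2 (r1 ('T' :: u))))))))
      = 'T' :: r8 (r7 (r6 (r5 (r4 (r3 (r2 (r1 u))))))) := by
  unfold r1 r2 r3 r4 r5 r6 r7 r8
  rw [repl_cons_head_ne 'y' _ _ 'T' _ (by decide), repl_cons_head_ne 'y' _ _ 'T' _ (by decide),
      repl_cons_head_ne 'M' _ _ 'T' _ (by decide), repl_cons_head_ne 'd' _ _ 'T' _ (by decide),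
      repl_cons_head_ne 'H' _ _ 'T' _ (by decide), repl_cons_head_ne 'm' _ _ 'T' _ (by decide),
      repl_cons_head_ne 's' _ _ 'T' _ (by decide), repl_cons_head_ne 'S' _ _ 'T' _ (by decide)]

-- the two boundary conditions that need the D_-side hypotheses
lemma ss_not_prefix_chain (t : List Char) (h : t.take 2 ≠ ['S','S']) :
    (['S','S'] : List Char).isPrefixOf (r7 (r6 (r5 (r4 (r3 (r2 (r1 t))))))) = false := by
  cases t with
  | nil => rw [chain7_nil]; simp [List.isPrefixOf]
  | cons c u =>
    by_cases hc : c = 'S'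
    · subst hc
      have hu : u.head? ≠ some 'S' := by
        cases u with
        | nil => simp
        | cons e v =>
          simp only [List.head?_cons, ne_eq, Option.some.injEq]
          intro he
          subst he
          exact h rfl
      rw [chain7_S_cons u]
      have hz : (r7 (r6 (r5 (r4 (r3 (r2 (r1 u))))))).head? ≠ some 'S' :=
        head_c7 u 'S' hu (by decide)
      have hfalse := isPrefixOf_false_of_head 'S' [] _ hz
      simp [List.isPrefixOf, hfalse]
    · have hz : (r7 (r6 (r5 (r4 (r3 (r2 (r1 (c :: u)))))))).head? ≠ some 'S' :=
        head_c7 (c :: u) 'S' (by simp [hc]) (by decide)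
      exact isPrefixOf_false_of_head 'S' ['S'] _ hz

lemma qt_not_prefix_chain (t : List Char) (h : ∀ u, t ≠ 'T' :: '\'' :: u) :
    (['T','\''] : List Char).isPrefixOf (r8 (r7 (r6 (r5 (r4 (r3 (r2 (r1 t)))))))) = false := by
  cases t with
  | nil => rw [chain8_nil]; simp [List.isPrefixOf]
  | cons c u =>
    by_cases hc : c = 'T'
    · subst hc
      have hu : u.head? ≠ some '\'' := by
        cases u with
        | nil => simp
        | cons e v =>
          simp only [List.head?_cons, ne_eq, Option.some.injEq]
          intro he
          subst he
          exact h v rfl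
      rw [chain8_T_cons u]
      have hz : (r8 (r7 (r6 (r5 (r4 (r3 (r2 (r1 u)))))))).head? ≠ some '\'' :=
        head_c8 u '\'' hu (by decide)
      have hfalse := isPrefixOf_false_of_head '\'' [] _ hz
      simp [List.isPrefixOf, hfalse]
    · have hz : (r8 (r7 (r6 (r5 (r4 (r3 (r2 (r1 (c :: u))))))))).head? ≠ some 'T' :=
        head_c8 (c :: u) 'T' (by simp [hc]) (by decide)
      exact isPrefixOf_false_of_head 'T' ['\''] _ hz

-- block lemmas for A's fused passes
lemma P1_run_y (n : Nat) (t : List Char) (ht : t.head? ≠ some 'y') :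
    P1 (List.replicate n 'y' ++ t)
      = lpow ['%','Y'] (n / 4) ++ lpow ['%','y'] (n % 4 / 2)
          ++ List.replicate (n % 4 % 2) 'y' ++ P1 t := by
  unfold P1 P2
  rw [run_y4 n t ht]
  simp only [List.append_assoc]
  rw [show r2 (lpow ['%','Y'] (n / 4) ++ (List.replicate (n % 4) 'y' ++ r1 t))
        = lpow ['%','Y'] (n / 4) ++ r2 (List.replicate (n % 4) 'y' ++ r1 t) by
    unfold r2; exact repl_append_not_mem _ _ _ _ _ (not_mem_lpow _ _ _ (by decide))]
  rw [run_y2 (n % 4) (r1 t) (head_c1 t 'y' ht (by decide))]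
  simp only [List.append_assoc]
  rw [P3_pass (lpow ['%','Y'] (n / 4)) _ (not_mem_lpow _ _ _ (by decide))
    (not_mem_lpow _ _ _ (by decide)) (not_mem_lpow _ _ _ (by decide))
    (not_mem_lpow _ _ _ (by decide)) (not_mem_lpow _ _ _ (by decide))
    (not_mem_lpow _ _ _ (by decide)) (not_mem_lpow _ _ _ (by decide))]
  rw [P3_pass (lpow ['%','y'] (n % 4 / 2)) _ (not_mem_lpow _ _ _ (by decide))
    (not_mem_lpow _ _ _ (by decide)) (not_mem_lpow _ _ _ (by decide))
    (not_mem_lpow _ _ _ (by decide)) (not_mem_lpow _ _ _ (by decide))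
    (not_mem_lpow _ _ _ (by decide)) (not_mem_lpow _ _ _ (by decide))]
  rw [P3_pass (List.replicate (n % 4 % 2) 'y') _ (not_mem_replicate _ _ _ (by decide))
    (not_mem_replicate _ _ _ (by decide)) (not_mem_replicate _ _ _ (by decide))
    (not_mem_replicate _ _ _ (by decide)) (not_mem_replicate _ _ _ (by decide))
    (not_mem_replicate _ _ _ (by decide)) (not_mem_replicate _ _ _ (by decide))]
lemma P1_run_M (n : Nat) (t : List Char) (ht : t.head? ≠ some 'M')
    (hD : ¬ (n % 2 = 0 ∧ t.head? = some 'm')) :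
    P1 (List.replicate n 'M' ++ t)
      = lpow ['%','m'] (n / 2) ++ List.replicate (n % 2) 'M' ++ P1 t := by
  unfold P1 P2 P3
  rw [show r1 (List.replicate n 'M' ++ t) = List.replicate n 'M' ++ r1 t by
    unfold r1; exact repl_append_not_mem _ _ _ _ _ (not_mem_replicate _ _ _ (by decide))]
  rw [show r2 (List.replicate n 'M' ++ r1 t) = List.replicate n 'M' ++ r2 (r1 t) by
    unfold r2; exact repl_append_not_mem _ _ _ _ _ (not_mem_replicate _ _ _ (by decide))]
  rw [run_M n (r2 (r1 t)) (head_c2 t 'M' ht (by decide))]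
  simp only [List.append_assoc]
  unfold P4 P5
  rw [show r4 (lpow ['%','m'] (n / 2) ++ (List.replicate (n % 2) 'M' ++ r3 (r2 (r1 t))))
        = lpow ['%','m'] (n / 2) ++ (List.replicate (n % 2) 'M' ++ r4 (r3 (r2 (r1 t)))) by
    unfold r4
    rw [repl_append_not_mem _ _ _ _ _ (not_mem_lpow _ _ _ (by decide)),
        repl_append_not_mem _ _ _ _ _ (not_mem_replicate _ _ _ (by decide))]]
  rw [show r5 (lpow ['%','m'] (n / 2) ++ (List.replicate (n % 2) 'M' ++ r4 (r3 (r2 (r1 t)))))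
        = lpow ['%','m'] (n / 2) ++ (List.replicate (n % 2) 'M' ++ r5 (r4 (r3 (r2 (r1 t))))) by
    unfold r5
    rw [repl_append_not_mem _ _ _ _ _ (not_mem_lpow _ _ _ (by decide)),
        repl_append_not_mem _ _ _ _ _ (not_mem_replicate _ _ _ (by decide))]]
  unfold P6
  have hx : (List.replicate (n % 2) 'M' ++ r5 (r4 (r3 (r2 (r1 t))))).head? ≠ some 'm' := by
    rcases Nat.mod_two_eq_zero_or_one n with hpar | hpar
    · rw [hpar]
      simp only [List.replicate, List.nil_append]
      have htm : t.head? ≠ some 'm' := fun hh => hD ⟨hpar, hh⟩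
      exact head_c5 t 'm' htm (by decide)
    · rw [hpar]
      simp [List.replicate]
  rw [show r6 (lpow ['%','m'] (n / 2) ++ (List.replicate (n % 2) 'M' ++ r5 (r4 (r3 (r2 (r1 t))))))
        = lpow ['%','m'] (n / 2) ++ (List.replicate (n % 2) 'M' ++ r6 (r5 (r4 (r3 (r2 (r1 t)))))) by
    unfold r6
    rw [repl_mm_pass ['%','M'] (n / 2) _ hx,
        repl_append_not_mem _ _ _ _ _ (not_mem_replicate _ _ _ (by decide))]]
  rw [P7_pass (lpow ['%','m'] (n / 2)) _ (not_mem_lpow _ _ _ (by decide))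
    (not_mem_lpow _ _ _ (by decide)) (not_mem_lpow _ _ _ (by decide))]
  rw [P7_pass (List.replicate (n % 2) 'M') _ (not_mem_replicate _ _ _ (by decide))
    (not_mem_replicate _ _ _ (by decide)) (not_mem_replicate _ _ _ (by decide))]
lemma P1_run_d (n : Nat) (t : List Char) (ht : t.head? ≠ some 'd') :
    P1 (List.replicate n 'd' ++ t)
      = lpow ['%','d'] (n / 2) ++ List.replicate (n % 2) 'd' ++ P1 t := by
  unfold P1 P2 P3 P4
  rw [show r1 (List.replicate n 'd' ++ t) = List.replicate n 'd' ++ r1 t by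
    unfold r1; exact repl_append_not_mem _ _ _ _ _ (not_mem_replicate _ _ _ (by decide))]
  rw [show r2 (List.replicate n 'd' ++ r1 t) = List.replicate n 'd' ++ r2 (r1 t) by
    unfold r2; exact repl_append_not_mem _ _ _ _ _ (not_mem_replicate _ _ _ (by decide))]
  rw [show r3 (List.replicate n 'd' ++ r2 (r1 t)) = List.replicate n 'd' ++ r3 (r2 (r1 t)) by
    unfold r3; exact repl_append_not_mem _ _ _ _ _ (not_mem_replicate _ _ _ (by decide))]
  rw [run_d n (r3 (r2 (r1 t))) (head_c3 t 'd' ht (by decide))]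
  simp only [List.append_assoc]
  rw [P5_pass (lpow ['%','d'] (n / 2)) _ (not_mem_lpow _ _ _ (by decide))
    (not_mem_lpow _ _ _ (by decide)) (not_mem_lpow _ _ _ (by decide))
    (not_mem_lpow _ _ _ (by decide)) (not_mem_lpow _ _ _ (by decide))]
  rw [P5_pass (List.replicate (n % 2) 'd') _ (not_mem_replicate _ _ _ (by decide))
    (not_mem_replicate _ _ _ (by decide)) (not_mem_replicate _ _ _ (by decide))
    (not_mem_replicate _ _ _ (by decide)) (not_mem_replicate _ _ _ (by decide))]
lemma P1_run_H (n : Nat) (t : List Char) (ht : t.head? ≠ some 'H') :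
    P1 (List.replicate n 'H' ++ t)
      = lpow ['%','H'] (n / 2) ++ List.replicate (n % 2) 'H' ++ P1 t := by
  unfold P1 P2 P3 P4 P5
  rw [show r1 (List.replicate n 'H' ++ t) = List.replicate n 'H' ++ r1 t by
    unfold r1; exact repl_append_not_mem _ _ _ _ _ (not_mem_replicate _ _ _ (by decide))]
  rw [show r2 (List.replicate n 'H' ++ r1 t) = List.replicate n 'H' ++ r2 (r1 t) by
    unfold r2; exact repl_append_not_mem _ _ _ _ _ (not_mem_replicate _ _ _ (by decide))]
  rw [show r3 (List.replicate n 'H' ++ r2 (r1 t)) = List.replicate n 'H' ++ r3 (r2 (r1 t)) by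
    unfold r3; exact repl_append_not_mem _ _ _ _ _ (not_mem_replicate _ _ _ (by decide))]
  rw [show r4 (List.replicate n 'H' ++ r3 (r2 (r1 t))) = List.replicate n 'H' ++ r4 (r3 (r2 (r1 t))) by
    unfold r4; exact repl_append_not_mem _ _ _ _ _ (not_mem_replicate _ _ _ (by decide))]
  rw [run_H n (r4 (r3 (r2 (r1 t)))) (head_c4 t 'H' ht (by decide))]
  simp only [List.append_assoc]
  rw [P6_pass (lpow ['%','H'] (n / 2)) _ (not_mem_lpow _ _ _ (by decide))
    (not_mem_lpow _ _ _ (by decide)) (not_mem_lpow _ _ _ (by decide))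
    (not_mem_lpow _ _ _ (by decide))]
  rw [P6_pass (List.replicate (n % 2) 'H') _ (not_mem_replicate _ _ _ (by decide))
    (not_mem_replicate _ _ _ (by decide)) (not_mem_replicate _ _ _ (by decide))
    (not_mem_replicate _ _ _ (by decide))]
lemma P1_run_m (n : Nat) (t : List Char) (ht : t.head? ≠ some 'm') :
    P1 (List.replicate n 'm' ++ t)
      = lpow ['%','M'] (n / 2) ++ List.replicate (n % 2) 'm' ++ P1 t := by
  unfold P1 P2 P3 P4 P5 P6
  rw [show r1 (List.replicate n 'm' ++ t) = List.replicate n 'm' ++ r1 t by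
    unfold r1; exact repl_append_not_mem _ _ _ _ _ (not_mem_replicate _ _ _ (by decide))]
  rw [show r2 (List.replicate n 'm' ++ r1 t) = List.replicate n 'm' ++ r2 (r1 t) by
    unfold r2; exact repl_append_not_mem _ _ _ _ _ (not_mem_replicate _ _ _ (by decide))]
  rw [show r3 (List.replicate n 'm' ++ r2 (r1 t)) = List.replicate n 'm' ++ r3 (r2 (r1 t)) by
    unfold r3; exact repl_append_not_mem _ _ _ _ _ (not_mem_replicate _ _ _ (by decide))]
  rw [show r4 (List.replicate n 'm' ++ r3 (r2 (r1 t))) = List.replicate n 'm' ++ r4 (r3 (r2 (r1 t))) by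
    unfold r4; exact repl_append_not_mem _ _ _ _ _ (not_mem_replicate _ _ _ (by decide))]
  rw [show r5 (List.replicate n 'm' ++ r4 (r3 (r2 (r1 t)))) = List.replicate n 'm' ++ r5 (r4 (r3 (r2 (r1 t)))) by
    unfold r5; exact repl_append_not_mem _ _ _ _ _ (not_mem_replicate _ _ _ (by decide))]
  rw [run_m n (r5 (r4 (r3 (r2 (r1 t))))) (head_c5 t 'm' ht (by decide))]
  simp only [List.append_assoc]
  rw [P7_pass (lpow ['%','M'] (n / 2)) _ (not_mem_lpow _ _ _ (by decide))
    (not_mem_lpow _ _ _ (by decide)) (not_mem_lpow _ _ _ (by decide))]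
  rw [P7_pass (List.replicate (n % 2) 'm') _ (not_mem_replicate _ _ _ (by decide))
    (not_mem_replicate _ _ _ (by decide)) (not_mem_replicate _ _ _ (by decide))]
lemma P1_run_s (n : Nat) (t : List Char) (ht : t.head? ≠ some 's')
    (hD : ¬ (n % 2 = 0 ∧ t.take 2 = ['S','S'])) :
    P1 (List.replicate n 's' ++ t)
      = lpow ['%','S'] (n / 2) ++ List.replicate (n % 2) 's' ++ P1 t := by
  unfold P1 P2 P3 P4 P5 P6 P7
  rw [show r1 (List.replicate n 's' ++ t) = List.replicate n 's' ++ r1 t by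
    unfold r1; exact repl_append_not_mem _ _ _ _ _ (not_mem_replicate _ _ _ (by decide))]
  rw [show r2 (List.replicate n 's' ++ r1 t) = List.replicate n 's' ++ r2 (r1 t) by
    unfold r2; exact repl_append_not_mem _ _ _ _ _ (not_mem_replicate _ _ _ (by decide))]
  rw [show r3 (List.replicate n 's' ++ r2 (r1 t)) = List.replicate n 's' ++ r3 (r2 (r1 t)) by
    unfold r3; exact repl_append_not_mem _ _ _ _ _ (not_mem_replicate _ _ _ (by decide))]
  rw [show r4 (List.replicate n 's' ++ r3 (r2 (r1 t))) = List.replicate n 's' ++ r4 (r3 (r2 (r1 t))) by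
    unfold r4; exact repl_append_not_mem _ _ _ _ _ (not_mem_replicate _ _ _ (by decide))]
  rw [show r5 (List.replicate n 's' ++ r4 (r3 (r2 (r1 t)))) = List.replicate n 's' ++ r5 (r4 (r3 (r2 (r1 t)))) by
    unfold r5; exact repl_append_not_mem _ _ _ _ _ (not_mem_replicate _ _ _ (by decide))]
  rw [show r6 (List.replicate n 's' ++ r5 (r4 (r3 (r2 (r1 t))))) = List.replicate n 's' ++ r6 (r5 (r4 (r3 (r2 (r1 t))))) by
    unfold r6; exact repl_append_not_mem _ _ _ _ _ (not_mem_replicate _ _ _ (by decide))]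
  rw [run_s n (r6 (r5 (r4 (r3 (r2 (r1 t)))))) (head_c6 t 's' ht (by decide))]
  simp only [List.append_assoc]
  unfold P8
  have hss : (['S','S'] : List Char).isPrefixOf
      (List.replicate (n % 2) 's' ++ r7 (r6 (r5 (r4 (r3 (r2 (r1 t))))))) = false := by
    rcases Nat.mod_two_eq_zero_or_one n with hpar | hpar
    · rw [hpar]
      simp only [List.replicate, List.nil_append]
      exact ss_not_prefix_chain t (fun hh => hD ⟨hpar, hh⟩)
    · rw [hpar]
      exact isPrefixOf_false_of_head 'S' ['S'] _ (by simp [List.replicate])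
  rw [show r8 (lpow ['%','S'] (n / 2) ++ (List.replicate (n % 2) 's' ++ r7 (r6 (r5 (r4 (r3 (r2 (r1 t))))))))
        = lpow ['%','S'] (n / 2) ++ (List.replicate (n % 2) 's' ++ r8 (r7 (r6 (r5 (r4 (r3 (r2 (r1 t)))))))) by
    unfold r8
    rw [repl_sss_pass ['%','f'] (n / 2) _ hss,
        repl_append_not_mem _ _ _ _ _ (not_mem_replicate _ _ _ (by decide))]]
  rw [P9_pass (lpow ['%','S'] (n / 2)) _ (not_mem_lpow _ _ _ (by decide))]
  rw [P9_pass (List.replicate (n % 2) 's') _ (not_mem_replicate _ _ _ (by decide))]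
lemma P1_run_S (n : Nat) (t : List Char) (ht : t.head? ≠ some 'S') :
    P1 (List.replicate n 'S' ++ t)
      = lpow ['%','f'] (n / 3) ++ List.replicate (n % 3) 'S' ++ P1 t := by
  unfold P1 P2 P3 P4 P5 P6 P7 P8
  rw [show r1 (List.replicate n 'S' ++ t) = List.replicate n 'S' ++ r1 t by
    unfold r1; exact repl_append_not_mem _ _ _ _ _ (not_mem_replicate _ _ _ (by decide))]
  rw [show r2 (List.replicate n 'S' ++ r1 t) = List.replicate n 'S' ++ r2 (r1 t) by
    unfold r2; exact repl_append_not_mem _ _ _ _ _ (not_mem_replicate _ _ _ (by decide))]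
  rw [show r3 (List.replicate n 'S' ++ r2 (r1 t)) = List.replicate n 'S' ++ r3 (r2 (r1 t)) by
    unfold r3; exact repl_append_not_mem _ _ _ _ _ (not_mem_replicate _ _ _ (by decide))]
  rw [show r4 (List.replicate n 'S' ++ r3 (r2 (r1 t))) = List.replicate n 'S' ++ r4 (r3 (r2 (r1 t))) by
    unfold r4; exact repl_append_not_mem _ _ _ _ _ (not_mem_replicate _ _ _ (by decide))]
  rw [show r5 (List.replicate n 'S' ++ r4 (r3 (r2 (r1 t)))) = List.replicate n 'S' ++ r5 (r4 (r3 (r2 (r1 t)))) by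
    unfold r5; exact repl_append_not_mem _ _ _ _ _ (not_mem_replicate _ _ _ (by decide))]
  rw [show r6 (List.replicate n 'S' ++ r5 (r4 (r3 (r2 (r1 t))))) = List.replicate n 'S' ++ r6 (r5 (r4 (r3 (r2 (r1 t))))) by
    unfold r6; exact repl_append_not_mem _ _ _ _ _ (not_mem_replicate _ _ _ (by decide))]
  rw [show r7 (List.replicate n 'S' ++ r6 (r5 (r4 (r3 (r2 (r1 t)))))) = List.replicate n 'S' ++ r7 (r6 (r5 (r4 (r3 (r2 (r1 t)))))) by
    unfold r7; exact repl_append_not_mem _ _ _ _ _ (not_mem_replicate _ _ _ (by decide))]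
  rw [run_S n (r7 (r6 (r5 (r4 (r3 (r2 (r1 t))))))) (head_c7 t 'S' ht (by decide))]
  simp only [List.append_assoc]
  rw [P9_pass (lpow ['%','f'] (n / 3)) _ (not_mem_lpow _ _ _ (by decide))]
  rw [P9_pass (List.replicate (n % 3) 'S') _ (not_mem_replicate _ _ _ (by decide))]
lemma P1_cons_default (c : Char) (t : List Char) (h1 : c ≠ 'y') (h2 : c ≠ 'M') (h3 : c ≠ 'd')
    (h4 : c ≠ 'H') (h5 : c ≠ 'm') (h6 : c ≠ 's') (h7 : c ≠ 'S') (h8 : c ≠ '\'') :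
    P1 (c :: t) = c :: P1 t := by
  unfold P1 P2 P3 P4 P5 P6 P7 P8 P9 r1 r2 r3 r4 r5 r6 r7 r8 r9
  rw [repl_cons_head_ne 'y' _ _ c _ h1, repl_cons_head_ne 'y' _ _ c _ h1,
      repl_cons_head_ne 'M' _ _ c _ h2, repl_cons_head_ne 'd' _ _ c _ h3,
      repl_cons_head_ne 'H' _ _ c _ h4, repl_cons_head_ne 'm' _ _ c _ h5,
      repl_cons_head_ne 's' _ _ c _ h6, repl_cons_head_ne 'S' _ _ c _ h7,
      repl_cons_head_ne '\'' _ _ c _ h8]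

lemma repl_qt (o : Char) (os new x : List Char) (h1 : o ≠ '\'') (h2 : o ≠ 'T') :
    repl o os new ('\'' :: 'T' :: '\'' :: x) = '\'' :: 'T' :: '\'' :: repl o os new x := by
  rw [repl_cons_head_ne o os new '\'' _ (Ne.symm h1), repl_cons_head_ne o os new 'T' _ (Ne.symm h2),
      repl_cons_head_ne o os new '\'' _ (Ne.symm h1)]

lemma P1_quoteT (t : List Char) :
    P1 ('\'' :: 'T' :: '\'' :: t) = 'T' :: P1 t := by
  unfold P1 P2 P3 P4 P5 P6 P7 P8 P9
  rw [show r1 ('\'' :: 'T' :: '\'' :: t) = '\'' :: 'T' :: '\'' :: r1 t by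
    unfold r1; exact repl_qt _ _ _ _ (by decide) (by decide)]
  rw [show r2 ('\'' :: 'T' :: '\'' :: r1 t) = '\'' :: 'T' :: '\'' :: r2 (r1 t) by
    unfold r2; exact repl_qt _ _ _ _ (by decide) (by decide)]
  rw [show r3 ('\'' :: 'T' :: '\'' :: r2 (r1 t)) = '\'' :: 'T' :: '\'' :: r3 (r2 (r1 t)) by
    unfold r3; exact repl_qt _ _ _ _ (by decide) (by decide)]
  rw [show r4 ('\'' :: 'T' :: '\'' :: r3 (r2 (r1 t))) = '\'' :: 'T' :: '\'' :: r4 (r3 (r2 (r1 t))) by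
    unfold r4; exact repl_qt _ _ _ _ (by decide) (by decide)]
  rw [show r5 ('\'' :: 'T' :: '\'' :: r4 (r3 (r2 (r1 t)))) = '\'' :: 'T' :: '\'' :: r5 (r4 (r3 (r2 (r1 t)))) by
    unfold r5; exact repl_qt _ _ _ _ (by decide) (by decide)]
  rw [show r6 ('\'' :: 'T' :: '\'' :: r5 (r4 (r3 (r2 (r1 t))))) = '\'' :: 'T' :: '\'' :: r6 (r5 (r4 (r3 (r2 (r1 t))))) by
    unfold r6; exact repl_qt _ _ _ _ (by decide) (by decide)]
  rw [show r7 ('\'' :: 'T' :: '\'' :: r6 (r5 (r4 (r3 (r2 (r1 t)))))) = '\'' :: 'T' :: '\'' :: r7 (r6 (r5 (r4 (r3 (r2 (r1 t)))))) by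
    unfold r7; exact repl_qt _ _ _ _ (by decide) (by decide)]
  rw [show r8 ('\'' :: 'T' :: '\'' :: r7 (r6 (r5 (r4 (r3 (r2 (r1 t))))))) = '\'' :: 'T' :: '\'' :: r8 (r7 (r6 (r5 (r4 (r3 (r2 (r1 t))))))) by
    unfold r8; exact repl_qt _ _ _ _ (by decide) (by decide)]
  rw [show ('\'' :: 'T' :: '\'' :: r8 (r7 (r6 (r5 (r4 (r3 (r2 (r1 t))))))))
        = ('\'' :: ['T','\'']) ++ r8 (r7 (r6 (r5 (r4 (r3 (r2 (r1 t))))))) from rfl]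
  rw [show r9 (('\'' :: ['T','\'']) ++ r8 (r7 (r6 (r5 (r4 (r3 (r2 (r1 t))))))))
        = ['T'] ++ r9 (r8 (r7 (r6 (r5 (r4 (r3 (r2 (r1 t)))))))) by
    unfold r9; exact repl_tok _ _ _ _]
  rfl

lemma P1_quote_single (t : List Char) (h : ∀ u, t ≠ 'T' :: '\'' :: u) :
    P1 ('\'' :: t) = '\'' :: P1 t := by
  unfold P1 P2 P3 P4 P5 P6 P7 P8 P9 r1 r2 r3 r4 r5 r6 r7 r8 r9
  rw [repl_cons_head_ne 'y' _ _ '\'' _ (by decide), repl_cons_head_ne 'y' _ _ '\'' _ (by decide),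
      repl_cons_head_ne 'M' _ _ '\'' _ (by decide), repl_cons_head_ne 'd' _ _ '\'' _ (by decide),
      repl_cons_head_ne 'H' _ _ '\'' _ (by decide), repl_cons_head_ne 'm' _ _ '\'' _ (by decide),
      repl_cons_head_ne 's' _ _ '\'' _ (by decide), repl_cons_head_ne 'S' _ _ '\'' _ (by decide)]
  have hq := qt_not_prefix_chain t h
  unfold r1 r2 r3 r4 r5 r6 r7 r8 at hq
  rw [repl_cons_neg '\'' ['T','\''] ['T'] '\'' _ (by simp [List.isPrefixOf, hq])]

lemma takeWhile_replicate (L : Char) (t : List Char) :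
    t.takeWhile (· = L) = List.replicate (t.takeWhile (· = L)).length L := by
  apply List.eq_replicate_of_mem
  intro b hb
  have := List.mem_takeWhile_imp hb
  simpa using this

lemma head_dropWhile_ne (L : Char) (t : List Char) : (t.dropWhile (· = L)).head? ≠ some L := by
  induction t with
  | nil => simp
  | cons c u ih =>
    by_cases hc : c = L
    · simpa [List.dropWhile_cons, hc] using ih
    · simp [List.dropWhile_cons, hc]

lemma run_split (L : Char) (t : List Char) :
    L :: t = List.replicate ((t.takeWhile (· = L)).length + 1) L ++ t.dropWhile (· = L) := by
  rw [List.replicate_succ, List.cons_append, ← takeWhile_replicate]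
  rw [List.takeWhile_append_dropWhile]

lemma chain_nil : P1 [] = [] := by
  simp [P1, P2, P3, P4, P5, P6, P7, P8, P9, r1, r2, r3, r4, r5, r6, r7, r8, r9, repl_nil]

-- pvRun L cs i is the length of the run of the letter L immediately before position i;
-- Dl is the proof-side index formulation of the change region, on the character list.
def pvRun (L : Char) (cs : List Char) (i : Nat) : Nat :=
  ((cs.take i).reverse.takeWhile (· == L)).length

def Dl (cs : List Char) : Prop :=
  ∃ i ∈ List.range cs.length,
    (cs[i]? = some 'm' ∧ pvRun 'M' cs i % 2 = 0 ∧ pvRun 'M' cs i ≠ 0) ∨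
    (cs[i]? = some 'S' ∧ cs[i + 1]? = some 'S' ∧ pvRun 's' cs i % 2 = 0 ∧ pvRun 's' cs i ≠ 0)

lemma head_of_takeWhile (p : Char → Bool) (l : List Char)
    (h : (l.takeWhile p).length ≠ 0) : ∃ a u, l = a :: u ∧ p a = true := by
  cases l with
  | nil => simp at h
  | cons a u =>
    by_cases hp : p a
    · exact ⟨a, u, rfl, hp⟩
    · simp [List.takeWhile_cons, hp] at h

lemma rev_take_succ (cs : List Char) (i : Nat) (c : Char) (h : cs[i]? = some c) :
    (cs.take (i + 1)).reverse = c :: (cs.take i).reverse := by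
  rw [List.take_succ, h]
  simp

lemma rev_take_mem_tails (cs : List Char) (n : Nat) :
    (cs.take n).reverse ∈ cs.reverse.tails := by
  rw [List.mem_tails]
  exact List.reverse_suffix.mpr (List.take_prefix n cs)

-- the index formulation implies the suffix formulation D_ (the direction the verdict needs)
lemma Dl_imp_D (p : String) (h : Dl p.toList) : D_java_to_python_fmt_py p := by
  obtain ⟨i, _hi, hc⟩ := h
  unfold D_java_to_python_fmt_py
  rcases hc with ⟨h1, h2, h3⟩ | ⟨h1, h2, h3, h4⟩
  · obtain ⟨a, u, hu, ha⟩ := head_of_takeWhile _ _ h3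
    have haM : a = 'M' := by simpa using ha
    subst haM
    refine ⟨['m', 'M'], by decide, (p.toList.take (i + 1)).reverse,
      rev_take_mem_tails _ _, ?_, ?_⟩
    · rw [rev_take_succ _ _ _ h1, hu]
      simp [List.isPrefixOf]
    · rw [rev_take_succ _ _ _ h1]
      simpa [pvRun] using h2
  · obtain ⟨a, u, hu, ha⟩ := head_of_takeWhile _ _ h4
    have has : a = 's' := by simpa using ha
    subst has
    refine ⟨['S', 'S', 's'], by simp, (p.toList.take (i + 2)).reverse,
      rev_take_mem_tails _ _, ?_, ?_⟩
    · rw [show i + 2 = (i + 1) + 1 by omega, rev_take_succ _ _ _ h2,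
          rev_take_succ _ _ _ h1, hu]
      simp [List.isPrefixOf]
    · rw [show i + 2 = (i + 1) + 1 by omega, rev_take_succ _ _ _ h2,
          rev_take_succ _ _ _ h1]
      simpa [pvRun] using h3

lemma tw_all (p : Char → Bool) : ∀ l : List Char, l.all p = true → l.takeWhile p = l := by
  intro l
  induction l with
  | nil => intro _; rfl
  | cons c t ih =>
    intro h
    simp only [List.all_cons, Bool.and_eq_true] at h
    simp [List.takeWhile_cons, h.1, ih h.2]

lemma tw_replicate_ne (c L : Char) (n : Nat) (h : (c == L) = false) :
    (List.replicate n c).takeWhile (· == L) = [] := by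
  cases n with
  | zero => rfl
  | succ m => simp [List.replicate_succ, List.takeWhile_cons, h]

lemma getElem_shift (a t : List Char) (i : Nat) : (a ++ t)[a.length + i]? = t[i]? := by
  rw [List.getElem?_append_right (by omega)]
  congr 1
  omega

lemma take_append_len (a t : List Char) (i : Nat) :
    (a ++ t).take (a.length + i) = a ++ t.take i := by
  induction a with
  | nil => simp
  | cons c a' ih =>
    simp only [List.cons_append, List.length_cons]
    rw [show a'.length + 1 + i = (a'.length + i) + 1 by omega, List.take_succ_cons, ih]

lemma pvRun_append_safe (L : Char) (a t : List Char) (i : Nat)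
    (ha : a.reverse.takeWhile (· == L) = []) :
    pvRun L (a ++ t) (a.length + i) = pvRun L t i := by
  unfold pvRun
  rw [take_append_len, List.reverse_append, List.takeWhile_append]
  by_cases hall : (((t.take i).reverse).takeWhile (· == L)).length = ((t.take i).reverse).length
  · rw [if_pos hall, ha, List.append_nil, hall]
  · rw [if_neg hall]

lemma pvRun_append_notall (L : Char) (a t : List Char) (i : Nat)
    (hna : (((t.take i).reverse).takeWhile (· == L)).length ≠ ((t.take i).reverse).length) :
    pvRun L (a ++ t) (a.length + i) = pvRun L t i := by
  unfold pvRun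
  rw [take_append_len, List.reverse_append, List.takeWhile_append, if_neg hna]

lemma notall_of (L : Char) (t : List Char) (i : Nat) (ht : t.head? ≠ some L)
    (h0 : pvRun L t i ≠ 0) :
    (((t.take i).reverse).takeWhile (· == L)).length ≠ ((t.take i).reverse).length := by
  intro heq
  have hself : ((t.take i).reverse).takeWhile (· == L) = (t.take i).reverse :=
    (List.takeWhile_prefix _).eq_of_length heq
  cases i with
  | zero =>
    unfold pvRun at h0
    simp at h0
  | succ j =>
    cases t with
    | nil =>
      unfold pvRun at h0
      simp at h0
    | cons d u =>
      have hdmem : d ∈ ((d :: u).take (j + 1)).reverse.takeWhile (· == L) := by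
        rw [hself]
        simp [List.take_succ_cons]
      have hd := List.mem_takeWhile_imp hdmem
      simp only [beq_iff_eq] at hd
      simp [hd] at ht

lemma pvRun_run_self (L : Char) (n : Nat) (t : List Char) :
    pvRun L (List.replicate n L ++ t) n = n := by
  unfold pvRun
  rw [show (List.replicate n L ++ t).take n = List.replicate n L by
    have h := take_append_len (List.replicate n L) t 0
    simpa using h]
  rw [List.reverse_replicate, tw_all _ _ (by simp)]
  simp

lemma Dl_append_other (a t : List Char) (hMa : a.reverse.takeWhile (· == 'M') = [])
    (hsa : a.reverse.takeWhile (· == 's') = []) (h : Dl t) : Dl (a ++ t) := by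
  obtain ⟨i, hi, hcase⟩ := h
  simp only [List.mem_range] at hi
  refine ⟨a.length + i, by simp [List.mem_range]; omega, ?_⟩
  rcases hcase with ⟨h1, h2, h3⟩ | ⟨h1, h2, h3, h4⟩
  · exact Or.inl ⟨by rw [getElem_shift]; exact h1,
      by rw [pvRun_append_safe _ _ _ _ hMa]; exact h2,
      by rw [pvRun_append_safe _ _ _ _ hMa]; exact h3⟩
  · exact Or.inr ⟨by rw [getElem_shift]; exact h1,
      by rw [show a.length + i + 1 = a.length + (i + 1) by omega, getElem_shift]; exact h2,
      by rw [pvRun_append_safe _ _ _ _ hsa]; exact h3,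
      by rw [pvRun_append_safe _ _ _ _ hsa]; exact h4⟩

lemma Dl_cons_other (c : Char) (t : List Char) (hM : c ≠ 'M') (hs : c ≠ 's') (h : Dl t) :
    Dl (c :: t) :=
  Dl_append_other [c] t (by simp [List.takeWhile_cons, hM]) (by simp [List.takeWhile_cons, hs]) h

lemma Dl_append_Mrun (n : Nat) (t : List Char) (ht : t.head? ≠ some 'M') (h : Dl t) :
    Dl (List.replicate n 'M' ++ t) := by
  obtain ⟨i, hi, hcase⟩ := h
  simp only [List.mem_range] at hi
  refine ⟨(List.replicate n 'M').length + i, by simp [List.mem_range]; omega, ?_⟩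
  rcases hcase with ⟨h1, h2, h3⟩ | ⟨h1, h2, h3, h4⟩
  · have hna := notall_of 'M' t i ht h3
    exact Or.inl ⟨by rw [getElem_shift]; exact h1,
      by rw [pvRun_append_notall _ _ _ _ hna]; exact h2,
      by rw [pvRun_append_notall _ _ _ _ hna]; exact h3⟩
  · have hsafe : (List.replicate n 'M').reverse.takeWhile (· == 's') = [] := by
      rw [List.reverse_replicate]
      exact tw_replicate_ne _ _ _ (by decide)
    exact Or.inr ⟨by rw [getElem_shift]; exact h1,
      by rw [show (List.replicate n 'M').length + i + 1 = (List.replicate n 'M').length + (i + 1) by omega,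
             getElem_shift]; exact h2,
      by rw [pvRun_append_safe _ _ _ _ hsafe]; exact h3,
      by rw [pvRun_append_safe _ _ _ _ hsafe]; exact h4⟩

lemma Dl_append_srun (n : Nat) (t : List Char) (ht : t.head? ≠ some 's') (h : Dl t) :
    Dl (List.replicate n 's' ++ t) := by
  obtain ⟨i, hi, hcase⟩ := h
  simp only [List.mem_range] at hi
  refine ⟨(List.replicate n 's').length + i, by simp [List.mem_range]; omega, ?_⟩
  rcases hcase with ⟨h1, h2, h3⟩ | ⟨h1, h2, h3, h4⟩
  · have hsafe : (List.replicate n 's').reverse.takeWhile (· == 'M') = [] := by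
      rw [List.reverse_replicate]
      exact tw_replicate_ne _ _ _ (by decide)
    exact Or.inl ⟨by rw [getElem_shift]; exact h1,
      by rw [pvRun_append_safe _ _ _ _ hsafe]; exact h2,
      by rw [pvRun_append_safe _ _ _ _ hsafe]; exact h3⟩
  · have hna := notall_of 's' t i ht h4
    exact Or.inr ⟨by rw [getElem_shift]; exact h1,
      by rw [show (List.replicate n 's').length + i + 1 = (List.replicate n 's').length + (i + 1) by omega,
             getElem_shift]; exact h2,
      by rw [pvRun_append_notall _ _ _ _ hna]; exact h3,
      by rw [pvRun_append_notall _ _ _ _ hna]; exact h4⟩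

lemma Dl_Mrun_cond (n : Nat) (t : List Char) (hn : n % 2 = 0) (hn0 : n ≠ 0)
    (hm : t.head? = some 'm') : Dl (List.replicate n 'M' ++ t) := by
  cases t with
  | nil => simp at hm
  | cons d u =>
    simp only [List.head?_cons, Option.some.injEq] at hm
    subst hm
    refine ⟨n, by simp [List.mem_range], Or.inl ⟨?_, ?_, ?_⟩⟩
    · rw [List.getElem?_append_right (by simp)]
      simp
    · rw [pvRun_run_self]
      exact hn
    · rw [pvRun_run_self]
      exact hn0

lemma Dl_srun_cond (n : Nat) (t : List Char) (hn : n % 2 = 0) (hn0 : n ≠ 0)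
    (hSS : t.take 2 = ['S','S']) : Dl (List.replicate n 's' ++ t) := by
  cases t with
  | nil => simp at hSS
  | cons d u =>
    cases u with
    | nil => simp at hSS
    | cons e v =>
      have hde : d = 'S' ∧ e = 'S' := by simpa using hSS
      obtain ⟨hd, he⟩ := hde
      subst hd
      subst he
      refine ⟨n, by simp [List.mem_range], Or.inr ⟨?_, ?_, ?_, ?_⟩⟩
      · rw [List.getElem?_append_right (by simp)]
        simp
      · rw [List.getElem?_append_right (by simp : (List.replicate n 's').length ≤ n + 1)]
        have h1 : n + 1 - (List.replicate n 's').length = 1 := by simp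
        rw [h1]
        rfl
      · rw [pvRun_run_self]
        exact hn
      · rw [pvRun_run_self]
        exact hn0

lemma P1_eq_scan : ∀ (N : Nat) (cs : List Char), cs.length ≤ N → ¬ Dl cs →
    P1 cs = scanB cs := by
  intro N
  induction N with
  | zero =>
    intro cs hlen _
    have hnil : cs = [] := List.eq_nil_of_length_eq_zero (by omega)
    subst hnil
    rw [chain_nil]
    simp [scanB]
  | succ N ih =>
    intro cs hlen hnd
    cases cs with
    | nil => rw [chain_nil]; simp [scanB]
    | cons c t =>
      have hlen' : t.length ≤ N := by simpa using Nat.le_of_succ_le_succ hlen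
      by_cases hy : c = 'y'
      · subst hy
        have hh := head_dropWhile_ne 'y' t
        have hl : (t.dropWhile (· = 'y')).length ≤ N :=
          le_trans (List.length_dropWhile_le _ _) hlen'
        rw [run_split 'y' t] at hnd ⊢
        have hnd' : ¬ Dl (t.dropWhile (· = 'y')) := fun h => hnd (Dl_append_other _ _
          (by rw [List.reverse_replicate]; exact tw_replicate_ne _ _ _ (by decide))
          (by rw [List.reverse_replicate]; exact tw_replicate_ne _ _ _ (by decide)) h)
        rw [P1_run_y _ _ hh, scan_run_y _ _ hh, ih _ hl hnd']
      · by_cases hM : c = 'M'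
        · subst hM
          have hh := head_dropWhile_ne 'M' t
          have hl : (t.dropWhile (· = 'M')).length ≤ N :=
            le_trans (List.length_dropWhile_le _ _) hlen'
          rw [run_split 'M' t] at hnd ⊢
          have hnd' : ¬ Dl (t.dropWhile (· = 'M')) := fun h =>
            hnd (Dl_append_Mrun _ _ hh h)
          have hD : ¬ (((t.takeWhile (· = 'M')).length + 1) % 2 = 0 ∧
              (t.dropWhile (· = 'M')).head? = some 'm') := fun ⟨ha, hb⟩ =>
            hnd (Dl_Mrun_cond _ _ ha (by omega) hb)
          rw [P1_run_M _ _ hh hD, scan_run_M _ _ hh, ih _ hl hnd']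
        · by_cases hd : c = 'd'
          · subst hd
            have hh := head_dropWhile_ne 'd' t
            have hl : (t.dropWhile (· = 'd')).length ≤ N :=
              le_trans (List.length_dropWhile_le _ _) hlen'
            rw [run_split 'd' t] at hnd ⊢
            have hnd' : ¬ Dl (t.dropWhile (· = 'd')) := fun h => hnd (Dl_append_other _ _
              (by rw [List.reverse_replicate]; exact tw_replicate_ne _ _ _ (by decide))
              (by rw [List.reverse_replicate]; exact tw_replicate_ne _ _ _ (by decide)) h)
            rw [P1_run_d _ _ hh, scan_run_d _ _ hh, ih _ hl hnd']
          · by_cases hH : c = 'H'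
            · subst hH
              have hh := head_dropWhile_ne 'H' t
              have hl : (t.dropWhile (· = 'H')).length ≤ N :=
                le_trans (List.length_dropWhile_le _ _) hlen'
              rw [run_split 'H' t] at hnd ⊢
              have hnd' : ¬ Dl (t.dropWhile (· = 'H')) := fun h => hnd (Dl_append_other _ _
                (by rw [List.reverse_replicate]; exact tw_replicate_ne _ _ _ (by decide))
                (by rw [List.reverse_replicate]; exact tw_replicate_ne _ _ _ (by decide)) h)
              rw [P1_run_H _ _ hh, scan_run_H _ _ hh, ih _ hl hnd']
            · by_cases hm : c = 'm'
              · subst hm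
                have hh := head_dropWhile_ne 'm' t
                have hl : (t.dropWhile (· = 'm')).length ≤ N :=
                  le_trans (List.length_dropWhile_le _ _) hlen'
                rw [run_split 'm' t] at hnd ⊢
                have hnd' : ¬ Dl (t.dropWhile (· = 'm')) := fun h => hnd (Dl_append_other _ _
                  (by rw [List.reverse_replicate]; exact tw_replicate_ne _ _ _ (by decide))
                  (by rw [List.reverse_replicate]; exact tw_replicate_ne _ _ _ (by decide)) h)
                rw [P1_run_m _ _ hh, scan_run_m _ _ hh, ih _ hl hnd']
              · by_cases hs : c = 's'
                · subst hs
                  have hh := head_dropWhile_ne 's' t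
                  have hl : (t.dropWhile (· = 's')).length ≤ N :=
                    le_trans (List.length_dropWhile_le _ _) hlen'
                  rw [run_split 's' t] at hnd ⊢
                  have hnd' : ¬ Dl (t.dropWhile (· = 's')) := fun h =>
                    hnd (Dl_append_srun _ _ hh h)
                  have hD : ¬ (((t.takeWhile (· = 's')).length + 1) % 2 = 0 ∧
                      (t.dropWhile (· = 's')).take 2 = ['S','S']) := fun ⟨ha, hb⟩ =>
                    hnd (Dl_srun_cond _ _ ha (by omega) hb)
                  rw [P1_run_s _ _ hh hD, scan_run_s _ _ hh, ih _ hl hnd']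
                · by_cases hS : c = 'S'
                  · subst hS
                    have hh := head_dropWhile_ne 'S' t
                    have hl : (t.dropWhile (· = 'S')).length ≤ N :=
                      le_trans (List.length_dropWhile_le _ _) hlen'
                    rw [run_split 'S' t] at hnd ⊢
                    have hnd' : ¬ Dl (t.dropWhile (· = 'S')) := fun h => hnd (Dl_append_other _ _
                      (by rw [List.reverse_replicate]; exact tw_replicate_ne _ _ _ (by decide))
                      (by rw [List.reverse_replicate]; exact tw_replicate_ne _ _ _ (by decide)) h)
                    rw [P1_run_S _ _ hh, scan_run_S _ _ hh, ih _ hl hnd']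
                  · by_cases hq : c = '\''
                    · subst hq
                      cases t with
                      | nil =>
                        rw [P1_quote_single [] (by intro u; simp),
                            scan_quote_single [] (by intro u; simp)]
                        rw [chain_nil]
                        simp [scanB]
                      | cons d u =>
                        by_cases hdT : d = 'T'
                        · subst hdT
                          cases u with
                          | nil =>
                            rw [P1_quote_single ['T'] (by intro v; simp),
                                scan_quote_single ['T'] (by intro v; simp)]
                            have hnd' : ¬ Dl ['T'] := fun h =>
                              hnd (Dl_cons_other '\'' ['T'] (by decide) (by decide) h)
                            rw [ih ['T'] (by simpa using hlen') hnd']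
                          | cons e v =>
                            by_cases heq : e = '\''
                            · subst heq
                              have hnd' : ¬ Dl v := fun h =>
                                hnd (Dl_append_other ['\'', 'T', '\''] v (by decide) (by decide) h)
                              have hlv : v.length ≤ N := by
                                simp at hlen'
                                omega
                              rw [P1_quoteT v, scan_quoteT v, ih v hlv hnd']
                            · have hne : ∀ w, ('T' :: e :: v) ≠ 'T' :: '\'' :: w := by
                                intro w hw
                                simp at hw
                                exact heq hw.1
                              have hnd' : ¬ Dl ('T' :: e :: v) := fun h =>
                                hnd (Dl_cons_other '\'' _ (by decide) (by decide) h)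
                              rw [P1_quote_single _ hne, scan_quote_single _ hne,
                                  ih _ hlen' hnd']
                        · have hne : ∀ w, (d :: u) ≠ 'T' :: '\'' :: w := by
                            intro w hw
                            simp at hw
                            exact hdT hw.1
                          have hnd' : ¬ Dl (d :: u) := fun h =>
                            hnd (Dl_cons_other '\'' _ (by decide) (by decide) h)
                          rw [P1_quote_single _ hne, scan_quote_single _ hne, ih _ hlen' hnd']
                    · have hnd' : ¬ Dl t := fun h => hnd (Dl_cons_other c t hM hs h)
                      rw [P1_cons_default c t hy hM hd hH hm hs hS hq,
                          scan_cons_default c t hy hM hd hH hm hs hS hq, ih _ hlen' hnd']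

lemma A_toList (p : String) : (java_to_python_fmt_py p).toList = P1 p.toList := by
  have h : java_to_python_fmt_py p =
      PySem.Str.replace (PySem.Str.replace (PySem.Str.replace (PySem.Str.replace
        (PySem.Str.replace (PySem.Str.replace (PySem.Str.replace (PySem.Str.replace
          (PySem.Str.replace p "yyyy" "%Y") "yy" "%y") "MM" "%m") "dd" "%d") "HH" "%H")
            "mm" "%M") "ss" "%S") "SSS" "%f") "'T'" "T" := rfl
  rw [h]
  simp only [PySem.Str.toList_replace]
  rw [show ("yyyy" : String).toList = 'y' :: ['y','y','y'] from rfl,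
      show ("%Y" : String).toList = ['%','Y'] from rfl,
      show ("yy" : String).toList = 'y' :: ['y'] from rfl,
      show ("%y" : String).toList = ['%','y'] from rfl,
      show ("MM" : String).toList = 'M' :: ['M'] from rfl,
      show ("%m" : String).toList = ['%','m'] from rfl,
      show ("dd" : String).toList = 'd' :: ['d'] from rfl,
      show ("%d" : String).toList = ['%','d'] from rfl,
      show ("HH" : String).toList = 'H' :: ['H'] from rfl,
      show ("%H" : String).toList = ['%','H'] from rfl,
      show ("mm" : String).toList = 'm' :: ['m'] from rfl,
      show ("%M" : String).toList = ['%','M'] from rfl,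
      show ("ss" : String).toList = 's' :: ['s'] from rfl,
      show ("%S" : String).toList = ['%','S'] from rfl,
      show ("SSS" : String).toList = 'S' :: ['S','S'] from rfl,
      show ("%f" : String).toList = ['%','f'] from rfl,
      show ("'T'" : String).toList = '\'' :: ['T','\''] from rfl,
      show ("T" : String).toList = ['T'] from rfl]
  rw [replace_eq_repl, replace_eq_repl, replace_eq_repl, replace_eq_repl, replace_eq_repl,
      replace_eq_repl, replace_eq_repl, replace_eq_repl, replace_eq_repl]
  rfl


-- further lemmas: the change region is exact (A and B differ on every input in D_)

lemma notall_pos (L : Char) (t : List Char) (i : Nat) (ht : t.head? ≠ some L) (hi : i ≠ 0)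
    (hne : t ≠ []) :
    (((t.take i).reverse).takeWhile (· == L)).length ≠ ((t.take i).reverse).length := by
  intro heq
  have hself : ((t.take i).reverse).takeWhile (· == L) = (t.take i).reverse :=
    (List.takeWhile_prefix _).eq_of_length heq
  cases i with
  | zero => exact hi rfl
  | succ j =>
    cases t with
    | nil => exact absurd rfl hne
    | cons d u =>
      have hdmem : d ∈ ((d :: u).take (j + 1)).reverse.takeWhile (· == L) := by
        rw [hself]
        simp [List.take_succ_cons]
      have hd := List.mem_takeWhile_imp hdmem
      simp only [beq_iff_eq] at hd
      simp [hd] at ht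

lemma Dl_unappend_safe (a t : List Char) (hm : 'm' ∉ a) (hS : 'S' ∉ a)
    (hMa : a.reverse.takeWhile (· == 'M') = []) (hsa : a.reverse.takeWhile (· == 's') = [])
    (h : Dl (a ++ t)) : Dl t := by
  obtain ⟨i, hi, hc⟩ := h
  simp only [List.mem_range, List.length_append] at hi
  have hge : ∀ c : Char, (a ++ t)[i]? = some c → c ∉ a → a.length ≤ i := by
    intro c h1 hcn
    by_contra hlt
    push_neg at hlt
    rw [List.getElem?_append_left hlt] at h1
    exact hcn (List.mem_of_getElem? h1)
  rcases hc with ⟨h1, h2, h3⟩ | ⟨h1, h2, h3, h4⟩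
  · have hle := hge _ h1 hm
    have hii : i = a.length + (i - a.length) := by omega
    rw [hii] at h1 h2 h3
    rw [getElem_shift] at h1
    rw [pvRun_append_safe _ _ _ _ hMa] at h2 h3
    exact ⟨i - a.length, by simp [List.mem_range]; omega, Or.inl ⟨h1, h2, h3⟩⟩
  · have hle := hge _ h1 hS
    have hii : i = a.length + (i - a.length) := by omega
    rw [hii] at h1 h3 h4
    rw [getElem_shift] at h1
    rw [show i + 1 = a.length + (i - a.length + 1) by omega, getElem_shift] at h2
    rw [pvRun_append_safe _ _ _ _ hsa] at h3 h4
    exact ⟨i - a.length, by simp [List.mem_range]; omega, Or.inr ⟨h1, h2, h3, h4⟩⟩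

lemma Dl_unappend_Mrun (n : Nat) (t : List Char) (ht : t.head? ≠ some 'M')
    (hcol : ¬ (n % 2 = 0 ∧ t.head? = some 'm'))
    (h : Dl (List.replicate n 'M' ++ t)) : Dl t := by
  obtain ⟨i, hi, hc⟩ := h
  simp only [List.mem_range, List.length_append, List.length_replicate] at hi
  rcases hc with ⟨h1, h2, h3⟩ | ⟨h1, h2, h3, h4⟩
  · have hle : n ≤ i := by
      by_contra hlt
      push_neg at hlt
      rw [List.getElem?_append_left (by simpa using hlt), List.getElem?_replicate,
          if_pos hlt] at h1
      exact absurd (Option.some.inj h1) (by decide)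
    rcases Nat.eq_or_lt_of_le hle with heq | hlt
    · rw [show i = (List.replicate n 'M').length + 0 by simp; omega] at h1
      rw [getElem_shift] at h1
      have hz : t.head? = some 'm' := by
        cases t with
        | nil => simp at h1
        | cons c u => simpa using h1
      rw [show i = n from heq.symm, pvRun_run_self] at h2
      exact absurd ⟨h2, hz⟩ hcol
    · have hii : i = (List.replicate n 'M').length + (i - n) := by simp; omega
      rw [hii] at h1 h2 h3
      rw [getElem_shift] at h1
      have hna := notall_pos 'M' t (i - n) ht (by omega) (by intro hnil; rw [hnil] at h1; simp at h1)
      rw [pvRun_append_notall _ _ _ _ hna] at h2 h3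
      exact ⟨i - n, by simp [List.mem_range]; omega, Or.inl ⟨h1, h2, h3⟩⟩
  · have hle : n ≤ i := by
      by_contra hlt
      push_neg at hlt
      rw [List.getElem?_append_left (by simpa using hlt), List.getElem?_replicate,
          if_pos hlt] at h1
      exact absurd (Option.some.inj h1) (by decide)
    have hsa : (List.replicate n 'M').reverse.takeWhile (· == 's') = [] := by
      rw [List.reverse_replicate]; exact tw_replicate_ne _ _ _ (by decide)
    have hii : i = (List.replicate n 'M').length + (i - n) := by simp; omega
    rw [hii] at h1 h3 h4
    rw [getElem_shift] at h1
    rw [show i + 1 = (List.replicate n 'M').length + (i - n + 1) by simp; omega,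
        getElem_shift] at h2
    rw [pvRun_append_safe _ _ _ _ hsa] at h3 h4
    exact ⟨i - n, by simp [List.mem_range]; omega, Or.inr ⟨h1, h2, h3, h4⟩⟩

lemma take2_of_getElem (t : List Char) (h0 : t[0]? = some 'S') (h1 : t[1]? = some 'S') :
    t.take 2 = ['S', 'S'] := by
  cases t with
  | nil => simp at h0
  | cons c u =>
    cases u with
    | nil => simp at h1
    | cons d v =>
      simp only [List.getElem?_cons_zero, Option.some.injEq] at h0
      have h1' : d = 'S' := by simpa using h1
      simp [h0, h1']

lemma Dl_unappend_srun (n : Nat) (t : List Char) (ht : t.head? ≠ some 's')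
    (hcol : ¬ (n % 2 = 0 ∧ t.take 2 = ['S', 'S']))
    (h : Dl (List.replicate n 's' ++ t)) : Dl t := by
  obtain ⟨i, hi, hc⟩ := h
  simp only [List.mem_range, List.length_append, List.length_replicate] at hi
  rcases hc with ⟨h1, h2, h3⟩ | ⟨h1, h2, h3, h4⟩
  · have hle : n ≤ i := by
      by_contra hlt
      push_neg at hlt
      rw [List.getElem?_append_left (by simpa using hlt), List.getElem?_replicate,
          if_pos hlt] at h1
      exact absurd (Option.some.inj h1) (by decide)
    have hMa : (List.replicate n 's').reverse.takeWhile (· == 'M') = [] := by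
      rw [List.reverse_replicate]; exact tw_replicate_ne _ _ _ (by decide)
    have hii : i = (List.replicate n 's').length + (i - n) := by simp; omega
    rw [hii] at h1 h2 h3
    rw [getElem_shift] at h1
    rw [pvRun_append_safe _ _ _ _ hMa] at h2 h3
    exact ⟨i - n, by simp [List.mem_range]; omega, Or.inl ⟨h1, h2, h3⟩⟩
  · have hle : n ≤ i := by
      by_contra hlt
      push_neg at hlt
      rw [List.getElem?_append_left (by simpa using hlt), List.getElem?_replicate,
          if_pos hlt] at h1
      exact absurd (Option.some.inj h1) (by decide)
    rcases Nat.eq_or_lt_of_le hle with heq | hlt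
    · rw [show i = (List.replicate n 's').length + 0 by simp; omega] at h1
      rw [getElem_shift] at h1
      rw [show i + 1 = (List.replicate n 's').length + 1 by simp; omega] at h2
      rw [getElem_shift] at h2
      rw [show i = n from heq.symm, pvRun_run_self] at h3
      exact absurd ⟨h3, take2_of_getElem t h1 h2⟩ hcol
    · have hii : i = (List.replicate n 's').length + (i - n) := by simp; omega
      rw [hii] at h1 h3 h4
      rw [getElem_shift] at h1
      rw [show i + 1 = (List.replicate n 's').length + (i - n + 1) by simp; omega,
          getElem_shift] at h2
      have hna := notall_pos 's' t (i - n) ht (by omega) (by intro hnil; rw [hnil] at h1; simp at h1)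
      rw [pvRun_append_notall _ _ _ _ hna] at h3 h4
      exact ⟨i - n, by simp [List.mem_range]; omega, Or.inr ⟨h1, h2, h3, h4⟩⟩

lemma Dl_unappend_mrun (n : Nat) (t : List Char)
    (h : Dl (List.replicate n 'm' ++ t)) : Dl t := by
  obtain ⟨i, hi, hc⟩ := h
  simp only [List.mem_range, List.length_append, List.length_replicate] at hi
  have hMa : (List.replicate n 'm').reverse.takeWhile (· == 'M') = [] := by
    rw [List.reverse_replicate]; exact tw_replicate_ne _ _ _ (by decide)
  have hsa : (List.replicate n 'm').reverse.takeWhile (· == 's') = [] := by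
    rw [List.reverse_replicate]; exact tw_replicate_ne _ _ _ (by decide)
  rcases hc with ⟨h1, h2, h3⟩ | ⟨h1, h2, h3, h4⟩
  · have hle : n ≤ i := by
      by_contra hlt
      push_neg at hlt
      apply h3
      unfold pvRun
      rw [List.take_append_of_le_length (by simp; omega), List.take_replicate,
          List.reverse_replicate, tw_replicate_ne _ _ _ (by decide)]
      rfl
    have hii : i = (List.replicate n 'm').length + (i - n) := by simp; omega
    rw [hii] at h1 h2 h3
    rw [getElem_shift] at h1
    rw [pvRun_append_safe _ _ _ _ hMa] at h2 h3
    exact ⟨i - n, by simp [List.mem_range]; omega, Or.inl ⟨h1, h2, h3⟩⟩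
  · have hle : n ≤ i := by
      by_contra hlt
      push_neg at hlt
      rw [List.getElem?_append_left (by simpa using hlt), List.getElem?_replicate,
          if_pos hlt] at h1
      exact absurd (Option.some.inj h1) (by decide)
    have hii : i = (List.replicate n 'm').length + (i - n) := by simp; omega
    rw [hii] at h1 h3 h4
    rw [show i + 1 = (List.replicate n 'm').length + (i - n + 1) by simp; omega,
        getElem_shift] at h2
    rw [getElem_shift] at h1
    rw [pvRun_append_safe _ _ _ _ hsa] at h3 h4
    exact ⟨i - n, by simp [List.mem_range]; omega, Or.inr ⟨h1, h2, h3, h4⟩⟩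

lemma Dl_unappend_Srun (n : Nat) (t : List Char)
    (h : Dl (List.replicate n 'S' ++ t)) : Dl t := by
  obtain ⟨i, hi, hc⟩ := h
  simp only [List.mem_range, List.length_append, List.length_replicate] at hi
  have hMa : (List.replicate n 'S').reverse.takeWhile (· == 'M') = [] := by
    rw [List.reverse_replicate]; exact tw_replicate_ne _ _ _ (by decide)
  have hsa : (List.replicate n 'S').reverse.takeWhile (· == 's') = [] := by
    rw [List.reverse_replicate]; exact tw_replicate_ne _ _ _ (by decide)
  rcases hc with ⟨h1, h2, h3⟩ | ⟨h1, h2, h3, h4⟩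
  · have hle : n ≤ i := by
      by_contra hlt
      push_neg at hlt
      rw [List.getElem?_append_left (by simpa using hlt), List.getElem?_replicate,
          if_pos hlt] at h1
      exact absurd (Option.some.inj h1) (by decide)
    have hii : i = (List.replicate n 'S').length + (i - n) := by simp; omega
    rw [hii] at h1 h2 h3
    rw [getElem_shift] at h1
    rw [pvRun_append_safe _ _ _ _ hMa] at h2 h3
    exact ⟨i - n, by simp [List.mem_range]; omega, Or.inl ⟨h1, h2, h3⟩⟩
  · have hle : n ≤ i := by
      by_contra hlt
      push_neg at hlt
      apply h4
      unfold pvRun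
      rw [List.take_append_of_le_length (by simp; omega), List.take_replicate,
          List.reverse_replicate, tw_replicate_ne _ _ _ (by decide)]
      rfl
    have hii : i = (List.replicate n 'S').length + (i - n) := by simp; omega
    rw [hii] at h1 h3 h4
    rw [show i + 1 = (List.replicate n 'S').length + (i - n + 1) by simp; omega,
        getElem_shift] at h2
    rw [getElem_shift] at h1
    rw [pvRun_append_safe _ _ _ _ hsa] at h3 h4
    exact ⟨i - n, by simp [List.mem_range]; omega, Or.inr ⟨h1, h2, h3, h4⟩⟩

lemma Dl_nil : ¬ Dl [] := by
  rintro ⟨i, hi, -⟩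
  simp at hi

lemma D_imp_Dl (p : String) (h : D_java_to_python_fmt_py p) : Dl p.toList := by
  obtain ⟨x, hx, t, ht, hpre, hpar⟩ := h
  rw [List.mem_tails] at ht
  obtain ⟨pre, hpt⟩ := ht
  simp only [List.mem_cons, List.mem_singleton] at hx
  rcases hx with hx | hx | hx
  · subst hx
    obtain ⟨w, hw⟩ := List.isPrefixOf_iff_prefix.mp hpre
    have hcs : p.toList = w.reverse ++ 'M' :: 'm' :: pre.reverse := by
      have : p.toList.reverse = pre ++ (['m', 'M'] ++ w) := by rw [← hw] at hpt; exact hpt.symm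
      have h2 := congrArg List.reverse this
      simpa using h2
    refine ⟨w.reverse.length + 1, ?_, Or.inl ⟨?_, ?_, ?_⟩⟩
    · rw [hcs]
      simp only [List.mem_range, List.length_append, List.length_reverse, List.length_cons]
      omega
    · rw [hcs, show w.reverse.length + 1 = (w.reverse ++ ['M']).length + 0 by simp,
          show w.reverse ++ 'M' :: 'm' :: pre.reverse = (w.reverse ++ ['M']) ++ 'm' :: pre.reverse by simp,
          getElem_shift]
      rfl
    · rw [hcs]
      unfold pvRun
      rw [take_append_len, List.take_succ_cons, List.take_zero, List.reverse_append]
      have hpar' : (('M' :: w).takeWhile (· == 'M')).length % 2 = 0 := by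
        rw [← hw] at hpar
        exact hpar
      simpa using hpar'
    · rw [hcs]
      unfold pvRun
      rw [take_append_len, List.take_succ_cons, List.take_zero, List.reverse_append]
      simp [List.takeWhile_cons]
  · subst hx
    obtain ⟨w, hw⟩ := List.isPrefixOf_iff_prefix.mp hpre
    have hcs : p.toList = w.reverse ++ 's' :: 'S' :: 'S' :: pre.reverse := by
      have : p.toList.reverse = pre ++ (['S', 'S', 's'] ++ w) := by rw [← hw] at hpt; exact hpt.symm
      have h2 := congrArg List.reverse this
      simpa using h2
    refine ⟨w.reverse.length + 1, ?_, Or.inr ⟨?_, ?_, ?_, ?_⟩⟩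
    · rw [hcs]
      simp only [List.mem_range, List.length_append, List.length_reverse, List.length_cons]
      omega
    · rw [hcs, show w.reverse.length + 1 = (w.reverse ++ ['s']).length + 0 by simp,
          show w.reverse ++ 's' :: 'S' :: 'S' :: pre.reverse = (w.reverse ++ ['s']) ++ 'S' :: 'S' :: pre.reverse by simp,
          getElem_shift]
      rfl
    · rw [hcs, show w.reverse.length + 1 + 1 = (w.reverse ++ ['s']).length + 1 by simp,
          show w.reverse ++ 's' :: 'S' :: 'S' :: pre.reverse = (w.reverse ++ ['s']) ++ 'S' :: 'S' :: pre.reverse by simp,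
          getElem_shift]
      rfl
    · rw [hcs]
      unfold pvRun
      rw [take_append_len, List.take_succ_cons, List.take_zero, List.reverse_append]
      have hpar' : (('s' :: w).takeWhile (· == 's')).length % 2 = 0 := by
        rw [← hw] at hpar
        exact hpar
      simpa using hpar'
    · rw [hcs]
      unfold pvRun
      rw [take_append_len, List.take_succ_cons, List.take_zero, List.reverse_append]
      simp [List.takeWhile_cons]
  · simp at hx

lemma lpow_succ_right (a : List Char) (q : Nat) : lpow a (q + 1) = lpow a q ++ a := by
  induction q with
  | zero => simp [lpow]
  | succ q' ih =>
    calc lpow a (q' + 1 + 1) = a ++ lpow a (q' + 1) := rfl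
      _ = a ++ (lpow a q' ++ a) := by rw [ih]
      _ = (a ++ lpow a q') ++ a := by rw [List.append_assoc]
      _ = lpow a (q' + 1) ++ a := rfl

lemma ne_append_left (a : List Char) {x y : List Char} (h : x ≠ y) : a ++ x ≠ a ++ y :=
  fun he => h (List.append_cancel_left he)

lemma head_replicate_cons (L : Char) (j : Nat) (x : List Char) (hj : j ≠ 0) :
    (List.replicate j L ++ x).head? = some L := by
  obtain ⟨j', rfl⟩ : ∃ j', j = j' + 1 := ⟨j - 1, by omega⟩
  simp [List.replicate_succ]

lemma P1_collision_M (n j : Nat) (u : List Char) (hn2 : n % 2 = 0) (hn0 : n ≠ 0) (hj : j ≠ 0)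
    (hu : u.head? ≠ some 'm') :
    P1 (List.replicate n 'M' ++ (List.replicate j 'm' ++ u))
      = lpow ['%','m'] (n / 2 - 1) ++ '%' :: (lpow ['%','M'] ((j + 1) / 2)
          ++ (List.replicate ((j + 1) % 2) 'm' ++ P7 (r6 (r5 (r4 (r3 (r2 (r1 u)))))))) := by
  have hq : n / 2 = (n / 2 - 1) + 1 := by omega
  unfold P1 P2 P3
  rw [show r1 (List.replicate n 'M' ++ (List.replicate j 'm' ++ u))
        = List.replicate n 'M' ++ (List.replicate j 'm' ++ r1 u) by
    unfold r1
    rw [repl_append_not_mem _ _ _ _ _ (not_mem_replicate _ _ _ (by decide)),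
        repl_append_not_mem _ _ _ _ _ (not_mem_replicate _ _ _ (by decide))]]
  rw [show r2 (List.replicate n 'M' ++ (List.replicate j 'm' ++ r1 u))
        = List.replicate n 'M' ++ (List.replicate j 'm' ++ r2 (r1 u)) by
    unfold r2
    rw [repl_append_not_mem _ _ _ _ _ (not_mem_replicate _ _ _ (by decide)),
        repl_append_not_mem _ _ _ _ _ (not_mem_replicate _ _ _ (by decide))]]
  rw [run_M n _ (by rw [head_replicate_cons 'm' j _ hj]; decide)]
  rw [hn2]
  simp only [List.replicate_zero, List.nil_append, List.append_nil]
  rw [show r3 (List.replicate j 'm' ++ r2 (r1 u)) = List.replicate j 'm' ++ r3 (r2 (r1 u)) by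
    unfold r3
    rw [repl_append_not_mem _ _ _ _ _ (not_mem_replicate _ _ _ (by decide))]]
  unfold P4 P5
  rw [show r4 (lpow ['%','m'] (n / 2) ++ (List.replicate j 'm' ++ r3 (r2 (r1 u))))
        = lpow ['%','m'] (n / 2) ++ (List.replicate j 'm' ++ r4 (r3 (r2 (r1 u)))) by
    unfold r4
    rw [repl_append_not_mem _ _ _ _ _ (not_mem_lpow _ _ _ (by decide)),
        repl_append_not_mem _ _ _ _ _ (not_mem_replicate _ _ _ (by decide))]]
  rw [show r5 (lpow ['%','m'] (n / 2) ++ (List.replicate j 'm' ++ r4 (r3 (r2 (r1 u)))))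
        = lpow ['%','m'] (n / 2) ++ (List.replicate j 'm' ++ r5 (r4 (r3 (r2 (r1 u))))) by
    unfold r5
    rw [repl_append_not_mem _ _ _ _ _ (not_mem_lpow _ _ _ (by decide)),
        repl_append_not_mem _ _ _ _ _ (not_mem_replicate _ _ _ (by decide))]]
  unfold P6
  rw [hq, lpow_succ_right]
  rw [show (lpow ['%','m'] (n / 2 - 1) ++ ['%', 'm']) ++ (List.replicate j 'm' ++ r5 (r4 (r3 (r2 (r1 u)))))
        = lpow ['%','m'] (n / 2 - 1) ++ ('%' :: (List.replicate (j + 1) 'm' ++ r5 (r4 (r3 (r2 (r1 u)))))) by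
    simp [List.replicate_succ, List.append_assoc]]
  have hC5 : (r5 (r4 (r3 (r2 (r1 u))))).head? ≠ some 'm' := head_c5 u 'm' hu (by decide)
  rw [show r6 (lpow ['%','m'] (n / 2 - 1) ++ ('%' :: (List.replicate (j + 1) 'm' ++ r5 (r4 (r3 (r2 (r1 u)))))))
        = lpow ['%','m'] (n / 2 - 1) ++ ('%' :: (lpow ['%','M'] ((j + 1) / 2)
            ++ (List.replicate ((j + 1) % 2) 'm' ++ r6 (r5 (r4 (r3 (r2 (r1 u)))))))) by
    unfold r6
    rw [repl_mm_pass ['%','M'] (n / 2 - 1) _ (by simp)]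
    rw [repl_cons_head_ne 'm' ['m'] ['%','M'] '%' _ (by decide)]
    have h := repl_run 'm' 2 ['%','M'] (by omega) (j + 1) (r5 (r4 (r3 (r2 (r1 u)))))
      (by exact hC5)
    rw [show List.replicate (2 - 1) 'm' = ['m'] from rfl] at h
    rw [h]
    simp [List.append_assoc]]
  rw [P7_pass (lpow ['%','m'] (n / 2 - 1)) _ (not_mem_lpow _ _ _ (by decide))
    (not_mem_lpow _ _ _ (by decide)) (not_mem_lpow _ _ _ (by decide))]
  rw [show ('%' :: (lpow ['%','M'] ((j + 1) / 2)
        ++ (List.replicate ((j + 1) % 2) 'm' ++ r6 (r5 (r4 (r3 (r2 (r1 u))))))))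
      = ['%'] ++ (lpow ['%','M'] ((j + 1) / 2)
        ++ (List.replicate ((j + 1) % 2) 'm' ++ r6 (r5 (r4 (r3 (r2 (r1 u))))))) from rfl]
  rw [P7_pass ['%'] _ (by decide) (by decide) (by decide)]
  rw [P7_pass (lpow ['%','M'] ((j + 1) / 2)) _ (not_mem_lpow _ _ _ (by decide))
    (not_mem_lpow _ _ _ (by decide)) (not_mem_lpow _ _ _ (by decide))]
  rw [P7_pass (List.replicate ((j + 1) % 2) 'm') _ (not_mem_replicate _ _ _ (by decide))
    (not_mem_replicate _ _ _ (by decide)) (not_mem_replicate _ _ _ (by decide))]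
  simp

lemma P1_collision_s (n j : Nat) (u : List Char) (hn2 : n % 2 = 0) (hn0 : n ≠ 0) (hj : j ≠ 0)
    (hu : u.head? ≠ some 'S') :
    P1 (List.replicate n 's' ++ (List.replicate j 'S' ++ u))
      = lpow ['%','S'] (n / 2 - 1) ++ '%' :: (lpow ['%','f'] ((j + 1) / 3)
          ++ (List.replicate ((j + 1) % 3) 'S' ++ P9 (r8 (r7 (r6 (r5 (r4 (r3 (r2 (r1 u)))))))))) := by
  have hq : n / 2 = (n / 2 - 1) + 1 := by omega
  unfold P1 P2 P3 P4 P5 P6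
  rw [show r1 (List.replicate n 's' ++ (List.replicate j 'S' ++ u))
        = List.replicate n 's' ++ (List.replicate j 'S' ++ r1 u) by
    unfold r1
    rw [repl_append_not_mem _ _ _ _ _ (not_mem_replicate _ _ _ (by decide)),
        repl_append_not_mem _ _ _ _ _ (not_mem_replicate _ _ _ (by decide))]]
  rw [show r2 (List.replicate n 's' ++ (List.replicate j 'S' ++ r1 u))
        = List.replicate n 's' ++ (List.replicate j 'S' ++ r2 (r1 u)) by
    unfold r2
    rw [repl_append_not_mem _ _ _ _ _ (not_mem_replicate _ _ _ (by decide)),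
        repl_append_not_mem _ _ _ _ _ (not_mem_replicate _ _ _ (by decide))]]
  rw [show r3 (List.replicate n 's' ++ (List.replicate j 'S' ++ r2 (r1 u)))
        = List.replicate n 's' ++ (List.replicate j 'S' ++ r3 (r2 (r1 u))) by
    unfold r3
    rw [repl_append_not_mem _ _ _ _ _ (not_mem_replicate _ _ _ (by decide)),
        repl_append_not_mem _ _ _ _ _ (not_mem_replicate _ _ _ (by decide))]]
  rw [show r4 (List.replicate n 's' ++ (List.replicate j 'S' ++ r3 (r2 (r1 u))))
        = List.replicate n 's' ++ (List.replicate j 'S' ++ r4 (r3 (r2 (r1 u)))) by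
    unfold r4
    rw [repl_append_not_mem _ _ _ _ _ (not_mem_replicate _ _ _ (by decide)),
        repl_append_not_mem _ _ _ _ _ (not_mem_replicate _ _ _ (by decide))]]
  rw [show r5 (List.replicate n 's' ++ (List.replicate j 'S' ++ r4 (r3 (r2 (r1 u)))))
        = List.replicate n 's' ++ (List.replicate j 'S' ++ r5 (r4 (r3 (r2 (r1 u))))) by
    unfold r5
    rw [repl_append_not_mem _ _ _ _ _ (not_mem_replicate _ _ _ (by decide)),
        repl_append_not_mem _ _ _ _ _ (not_mem_replicate _ _ _ (by decide))]]
  rw [show r6 (List.replicate n 's' ++ (List.replicate j 'S' ++ r5 (r4 (r3 (r2 (r1 u))))))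
        = List.replicate n 's' ++ (List.replicate j 'S' ++ r6 (r5 (r4 (r3 (r2 (r1 u)))))) by
    unfold r6
    rw [repl_append_not_mem _ _ _ _ _ (not_mem_replicate _ _ _ (by decide)),
        repl_append_not_mem _ _ _ _ _ (not_mem_replicate _ _ _ (by decide))]]
  unfold P7
  rw [run_s n _ (by rw [head_replicate_cons 'S' j _ hj]; decide)]
  rw [hn2]
  simp only [List.replicate_zero, List.nil_append, List.append_nil]
  rw [show r7 (List.replicate j 'S' ++ r6 (r5 (r4 (r3 (r2 (r1 u))))))
        = List.replicate j 'S' ++ r7 (r6 (r5 (r4 (r3 (r2 (r1 u)))))) by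
    unfold r7
    rw [repl_append_not_mem _ _ _ _ _ (not_mem_replicate _ _ _ (by decide))]]
  unfold P8
  rw [hq, lpow_succ_right]
  rw [show (lpow ['%','S'] (n / 2 - 1) ++ ['%', 'S']) ++ (List.replicate j 'S' ++ r7 (r6 (r5 (r4 (r3 (r2 (r1 u)))))))
        = lpow ['%','S'] (n / 2 - 1) ++ ('%' :: (List.replicate (j + 1) 'S' ++ r7 (r6 (r5 (r4 (r3 (r2 (r1 u)))))))) by
    simp [List.replicate_succ, List.append_assoc]]
  have hC7 : (r7 (r6 (r5 (r4 (r3 (r2 (r1 u))))))).head? ≠ some 'S' := head_c7 u 'S' hu (by decide)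
  rw [show r8 (lpow ['%','S'] (n / 2 - 1) ++ ('%' :: (List.replicate (j + 1) 'S' ++ r7 (r6 (r5 (r4 (r3 (r2 (r1 u)))))))))
        = lpow ['%','S'] (n / 2 - 1) ++ ('%' :: (lpow ['%','f'] ((j + 1) / 3)
            ++ (List.replicate ((j + 1) % 3) 'S' ++ r8 (r7 (r6 (r5 (r4 (r3 (r2 (r1 u)))))))))) by
    unfold r8
    rw [repl_sss_pass ['%','f'] (n / 2 - 1) _ (isPrefixOf_false_of_head 'S' ['S'] _ (by simp))]
    rw [repl_cons_head_ne 'S' ['S','S'] ['%','f'] '%' _ (by decide)]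
    have h := repl_run 'S' 3 ['%','f'] (by omega) (j + 1) (r7 (r6 (r5 (r4 (r3 (r2 (r1 u)))))))
      (by exact hC7)
    rw [show List.replicate (3 - 1) 'S' = ['S','S'] from rfl] at h
    rw [h]
    simp [List.append_assoc]]
  rw [P9_pass (lpow ['%','S'] (n / 2 - 1)) _ (not_mem_lpow _ _ _ (by decide))]
  rw [show ('%' :: (lpow ['%','f'] ((j + 1) / 3)
        ++ (List.replicate ((j + 1) % 3) 'S' ++ r8 (r7 (r6 (r5 (r4 (r3 (r2 (r1 u))))))))))
      = ['%'] ++ (lpow ['%','f'] ((j + 1) / 3)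
        ++ (List.replicate ((j + 1) % 3) 'S' ++ r8 (r7 (r6 (r5 (r4 (r3 (r2 (r1 u))))))))) from rfl]
  rw [P9_pass ['%'] _ (by decide)]
  rw [P9_pass (lpow ['%','f'] ((j + 1) / 3)) _ (not_mem_lpow _ _ _ (by decide))]
  rw [P9_pass (List.replicate ((j + 1) % 3) 'S') _ (not_mem_replicate _ _ _ (by decide))]
  simp

lemma tw_rev_replicate_ne (c L : Char) (n : Nat) (h : (c == L) = false) :
    (List.replicate n c).reverse.takeWhile (· == L) = [] := by
  rw [List.reverse_replicate]; exact tw_replicate_ne c L n h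

lemma P1_ne_scan : ∀ (N : Nat) (cs : List Char), cs.length ≤ N → Dl cs →
    P1 cs ≠ scanB cs := by
  intro N
  induction N with
  | zero =>
    intro cs hlen hnd
    have hnil : cs = [] := List.eq_nil_of_length_eq_zero (by omega)
    rw [hnil] at hnd
    exact absurd hnd Dl_nil
  | succ N ih =>
    intro cs hlen hnd
    cases cs with
    | nil => exact absurd hnd Dl_nil
    | cons c t =>
      have hlen' : t.length ≤ N := by simpa using Nat.le_of_succ_le_succ hlen
      by_cases hy : c = 'y'
      · subst hy
        have hh := head_dropWhile_ne 'y' t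
        have hl : (t.dropWhile (· = 'y')).length ≤ N :=
          le_trans (List.length_dropWhile_le _ _) hlen'
        rw [run_split 'y' t] at hnd ⊢
        have hnd' : Dl (t.dropWhile (· = 'y')) := Dl_unappend_safe _ _
          (not_mem_replicate _ _ _ (by decide)) (not_mem_replicate _ _ _ (by decide))
          (tw_rev_replicate_ne _ _ _ (by decide)) (tw_rev_replicate_ne _ _ _ (by decide)) hnd
        rw [P1_run_y _ _ hh, scan_run_y _ _ hh]
        simp only [List.append_assoc]
        exact ne_append_left _ (ne_append_left _ (ne_append_left _ (ih _ hl hnd')))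
      · by_cases hM : c = 'M'
        · subst hM
          have hh := head_dropWhile_ne 'M' t
          have hl : (t.dropWhile (· = 'M')).length ≤ N :=
            le_trans (List.length_dropWhile_le _ _) hlen'
          rw [run_split 'M' t] at hnd ⊢
          by_cases hcol : (((t.takeWhile (· = 'M')).length + 1) % 2 = 0 ∧
              (t.dropWhile (· = 'M')).head? = some 'm')
          · -- collision: A corrupts, B does not; the outputs differ at the fused position
            obtain ⟨hpar, hhead⟩ := hcol
            obtain ⟨c0, r0, hr0⟩ : ∃ c0 r0, t.dropWhile (· = 'M') = c0 :: r0 := by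
              cases hrest : t.dropWhile (· = 'M') with
              | nil => rw [hrest] at hhead; simp at hhead
              | cons c0 r0 => exact ⟨c0, r0, rfl⟩
            have hc0 : c0 = 'm' := by rw [hr0] at hhead; simpa using hhead
            rw [hr0, hc0] at hnd ⊢
            rw [run_split 'm' r0] at hnd ⊢
            have hu := head_dropWhile_ne 'm' r0
            set n := (t.takeWhile (· = 'M')).length + 1 with hn
            set j := (r0.takeWhile (· = 'm')).length + 1 with hj
            set u := r0.dropWhile (· = 'm') with hudef
            rw [P1_collision_M n j u hpar (by omega) (by omega) hu]
            rw [scan_run_M n _ (by rw [head_replicate_cons 'm' j _ (by omega)]; decide)]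
            rw [scan_run_m j u hu]
            rw [hpar]
            simp only [List.replicate_zero, List.nil_append, List.append_nil]
            obtain ⟨p2, hp2⟩ : ∃ p2, (j + 1) / 2 = p2 + 1 := ⟨(j + 1) / 2 - 1, by omega⟩
            rw [hp2, show lpow ['%','M'] (p2 + 1) = '%' :: 'M' :: lpow ['%','M'] p2 from rfl]
            rw [show n / 2 = (n / 2 - 1) + 1 by omega, lpow_succ_right]
            simp only [List.append_assoc, List.cons_append, List.singleton_append]
            intro he
            have h2 := List.append_cancel_left he
            have h3 := ((List.cons.injEq _ _ _ _).mp h2).2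
            have h4 := ((List.cons.injEq _ _ _ _).mp h3).1
            exact absurd h4 (by decide)
          · have hnd' : Dl (t.dropWhile (· = 'M')) :=
              Dl_unappend_Mrun _ _ hh hcol hnd
            have hD : ¬ (((t.takeWhile (· = 'M')).length + 1) % 2 = 0 ∧
                (t.dropWhile (· = 'M')).head? = some 'm') := hcol
            rw [P1_run_M _ _ hh hD, scan_run_M _ _ hh]
            simp only [List.append_assoc]
            exact ne_append_left _ (ne_append_left _ (ih _ hl hnd'))
        · by_cases hd : c = 'd'
          · subst hd
            have hh := head_dropWhile_ne 'd' t
            have hl : (t.dropWhile (· = 'd')).length ≤ N :=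
              le_trans (List.length_dropWhile_le _ _) hlen'
            rw [run_split 'd' t] at hnd ⊢
            have hnd' : Dl (t.dropWhile (· = 'd')) := Dl_unappend_safe _ _
              (not_mem_replicate _ _ _ (by decide)) (not_mem_replicate _ _ _ (by decide))
              (tw_rev_replicate_ne _ _ _ (by decide)) (tw_rev_replicate_ne _ _ _ (by decide)) hnd
            rw [P1_run_d _ _ hh, scan_run_d _ _ hh]
            simp only [List.append_assoc]
            exact ne_append_left _ (ne_append_left _ (ih _ hl hnd'))
          · by_cases hH : c = 'H'
            · subst hH
              have hh := head_dropWhile_ne 'H' t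
              have hl : (t.dropWhile (· = 'H')).length ≤ N :=
                le_trans (List.length_dropWhile_le _ _) hlen'
              rw [run_split 'H' t] at hnd ⊢
              have hnd' : Dl (t.dropWhile (· = 'H')) := Dl_unappend_safe _ _
                (not_mem_replicate _ _ _ (by decide)) (not_mem_replicate _ _ _ (by decide))
                (tw_rev_replicate_ne _ _ _ (by decide)) (tw_rev_replicate_ne _ _ _ (by decide)) hnd
              rw [P1_run_H _ _ hh, scan_run_H _ _ hh]
              simp only [List.append_assoc]
              exact ne_append_left _ (ne_append_left _ (ih _ hl hnd'))
            · by_cases hm : c = 'm'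
              · subst hm
                have hh := head_dropWhile_ne 'm' t
                have hl : (t.dropWhile (· = 'm')).length ≤ N :=
                  le_trans (List.length_dropWhile_le _ _) hlen'
                rw [run_split 'm' t] at hnd ⊢
                have hnd' : Dl (t.dropWhile (· = 'm')) := Dl_unappend_mrun _ _ hnd
                rw [P1_run_m _ _ hh, scan_run_m _ _ hh]
                simp only [List.append_assoc]
                exact ne_append_left _ (ne_append_left _ (ih _ hl hnd'))
              · by_cases hs : c = 's'
                · subst hs
                  have hh := head_dropWhile_ne 's' t
                  have hl : (t.dropWhile (· = 's')).length ≤ N :=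
                    le_trans (List.length_dropWhile_le _ _) hlen'
                  rw [run_split 's' t] at hnd ⊢
                  by_cases hcol : (((t.takeWhile (· = 's')).length + 1) % 2 = 0 ∧
                      (t.dropWhile (· = 's')).take 2 = ['S', 'S'])
                  · obtain ⟨hpar, hSS⟩ := hcol
                    obtain ⟨r0, hr0⟩ : ∃ r0, t.dropWhile (· = 's') = 'S' :: r0 := by
                      cases hrest : t.dropWhile (· = 's') with
                      | nil => rw [hrest] at hSS; simp at hSS
                      | cons c0 r0 =>
                        rw [hrest] at hSS
                        have : c0 = 'S' := by
                          have := congrArg (·.head?) hSS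
                          simpa using this
                        exact ⟨r0, by rw [this]⟩
                    have hr0head : r0.head? = some 'S' := by
                      rw [hr0] at hSS
                      cases r0 with
                      | nil => simp at hSS
                      | cons d r1 =>
                        have : d = 'S' := by
                          have h2 := congrArg (fun l => l[1]?) hSS
                          simpa using h2
                        simp [this]
                    rw [hr0] at hnd ⊢
                    rw [run_split 'S' r0] at hnd ⊢
                    have hu := head_dropWhile_ne 'S' r0
                    set n := (t.takeWhile (· = 's')).length + 1 with hn
                    set j := (r0.takeWhile (· = 'S')).length + 1 with hj
                    set u := r0.dropWhile (· = 'S') with hudef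
                    have hj2 : 2 ≤ j := by
                      rw [hj]
                      cases r0 with
                      | nil => simp at hr0head
                      | cons d r1 =>
                        have hdS : d = 'S' := by simpa using hr0head
                        rw [hdS]
                        simp [List.takeWhile_cons]
                    rw [P1_collision_s n j u hpar (by omega) (by omega) hu]
                    rw [scan_run_s n _ (by rw [head_replicate_cons 'S' j _ (by omega)]; decide)]
                    rw [scan_run_S j u hu]
                    rw [hpar]
                    simp only [List.replicate_zero, List.nil_append, List.append_nil]
                    obtain ⟨p3, hp3⟩ : ∃ p3, (j + 1) / 3 = p3 + 1 := ⟨(j + 1) / 3 - 1, by omega⟩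
                    rw [hp3, show lpow ['%','f'] (p3 + 1) = '%' :: 'f' :: lpow ['%','f'] p3 from rfl]
                    rw [show n / 2 = (n / 2 - 1) + 1 by omega, lpow_succ_right]
                    simp only [List.append_assoc, List.cons_append, List.singleton_append]
                    intro he
                    have h2 := List.append_cancel_left he
                    have h3 := ((List.cons.injEq _ _ _ _).mp h2).2
                    have h4 := ((List.cons.injEq _ _ _ _).mp h3).1
                    exact absurd h4 (by decide)
                  · have hnd' : Dl (t.dropWhile (· = 's')) :=
                      Dl_unappend_srun _ _ hh hcol hnd
                    have hD : ¬ (((t.takeWhile (· = 's')).length + 1) % 2 = 0 ∧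
                        (t.dropWhile (· = 's')).take 2 = ['S', 'S']) := hcol
                    rw [P1_run_s _ _ hh hD, scan_run_s _ _ hh]
                    simp only [List.append_assoc]
                    exact ne_append_left _ (ne_append_left _ (ih _ hl hnd'))
                · by_cases hS : c = 'S'
                  · subst hS
                    have hh := head_dropWhile_ne 'S' t
                    have hl : (t.dropWhile (· = 'S')).length ≤ N :=
                      le_trans (List.length_dropWhile_le _ _) hlen'
                    rw [run_split 'S' t] at hnd ⊢
                    have hnd' : Dl (t.dropWhile (· = 'S')) := Dl_unappend_Srun _ _ hnd
                    rw [P1_run_S _ _ hh, scan_run_S _ _ hh]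
                    simp only [List.append_assoc]
                    exact ne_append_left _ (ne_append_left _ (ih _ hl hnd'))
                  · by_cases hq : c = '\''
                    · subst hq
                      cases t with
                      | nil =>
                        exact absurd (Dl_unappend_safe ['\''] [] (by decide) (by decide)
                          (by decide) (by decide) hnd) Dl_nil
                      | cons d v =>
                        by_cases hdT : d = 'T'
                        · subst hdT
                          cases v with
                          | nil =>
                            exact absurd (Dl_unappend_safe ['\'', 'T'] [] (by decide) (by decide)
                              (by decide) (by decide) hnd) Dl_nil
                          | cons e w =>
                            by_cases heq : e = '\''
                            · subst heq
                              have hnd' : Dl w := Dl_unappend_safe ['\'', 'T', '\''] w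
                                (by decide) (by decide) (by decide) (by decide) hnd
                              have hlw : w.length ≤ N := by
                                simp at hlen'
                                omega
                              rw [P1_quoteT w, scan_quoteT w]
                              intro he
                              exact ih w hlw hnd' (by injection he)
                            · have hne : ∀ z, ('T' :: e :: w) ≠ 'T' :: '\'' :: z := by
                                intro z hz
                                simp at hz
                                exact heq hz.1
                              have hnd' : Dl ('T' :: e :: w) := Dl_unappend_safe ['\''] _
                                (by decide) (by decide) (by decide) (by decide) hnd
                              rw [P1_quote_single _ hne, scan_quote_single _ hne]
                              intro he
                              exact ih _ hlen' hnd' (by injection he)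
                        · have hne : ∀ z, (d :: v) ≠ 'T' :: '\'' :: z := by
                            intro z hz
                            simp at hz
                            exact hdT hz.1
                          have hnd' : Dl (d :: v) := Dl_unappend_safe ['\''] _
                            (by decide) (by decide) (by decide) (by decide) hnd
                          rw [P1_quote_single _ hne, scan_quote_single _ hne]
                          intro he
                          exact ih _ hlen' hnd' (by injection he)
                    · have hnd' : Dl t := Dl_unappend_safe [c] t
                        (by intro hmem; simp at hmem; exact hm hmem.symm)
                        (by intro hmem; simp at hmem; exact hS hmem.symm)
                        (by simp [List.takeWhile_cons, hM]) (by simp [List.takeWhile_cons, hs]) hnd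
                      rw [P1_cons_default c t hy hM hd hH hm hs hS hq,
                          scan_cons_default c t hy hM hd hH hm hs hS hq]
                      intro he
                      exact ih _ hlen' hnd' (by injection he)

-- ===== VERDICT (by name: the statement is the Claim_ definition above) =====
theorem java_to_python_fmt_py_spec : Claim_unchanged_java_to_python_fmt_py := by
  intro pattern _hdom
  unfold Spec_java_to_python_fmt_py
  intro hD
  apply String.toList_inj.mp
  rw [A_toList]
  rw [show (java_to_python_fmt_py_alt pattern).toList = scanB pattern.toList by
    unfold java_to_python_fmt_py_alt; exact String.toList_ofList]
  exact P1_eq_scan pattern.toList.length pattern.toList le_rfl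
    (fun hDl => hD (Dl_imp_D pattern hDl))

theorem java_to_python_fmt_py_changed : Claim_changed_java_to_python_fmt_py := by
  unfold Claim_changed_java_to_python_fmt_py; decide

theorem java_to_python_fmt_py_tight : Claim_exact_java_to_python_fmt_py := by
  unfold Claim_exact_java_to_python_fmt_py
  intro p _ hD he
  have hl := congrArg String.toList he
  rw [A_toList] at hl
  rw [show (java_to_python_fmt_py_alt p).toList = scanB p.toList by
    unfold java_to_python_fmt_py_alt; exact String.toList_ofList] at hl
  exact P1_ne_scan p.toList.length p.toList le_rfl (D_imp_Dl p hD) hl
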